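/- GENERATED by mk_final_copies.py from the proof of the farm's unit `start_decoder.C12` (farm:start_decoder.C12.2: Lemmas.lean) as the
   re-elaboration sweep compiled it — do not edit. -/
import Asan.CheckWalk
import Vorbis.Spec.Units.start_decoder_C12
import Vorbis.Spec.StartDecoderCarry

/-!
  The unit `start_decoder.C12` (0x114db9 … 0x114f0a, stb_vorbis_fixed.c:3899–3910), over the carry layer of part C
  (Vorbis/Spec/StartDecoderCarry.lean). One lemma per stretch between calls; Proof.lean composes them with `ReachVia.trans`.
      cb_block cur_cb_inside acc_cb obj_where obj_live      where `cb(i)` / `*f` are; EVERY check site of the segment (`acc_cb`)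
      malloc_pre arena_pre mults_top                        the callees' preconditions
      QWin quiet_carry FieldsEq fields_of_kept              `Frame` + `Cur` + the struct's fields over the segment's own stores
      build14 build_ret malloc_ret build13 build_fail build_err   PURE: the exit / cut assertions from what the walks leave
      Ret12 (0x114e38 / 0x114eb4)  Fail12 (0x114ed4)  Err12 (0x114ee7)   the assertions at the inner cut points
      req_eq dbl_eq zx8_addr part32_addr prod_nat u32_dim u32_ent u32_se len_slot n_range   32-bit arithmetic, field reads
      walk1   entry → AtC14 | Ret12@cut168 | Ret12@cut169        walk2a / walk2b   Ret12 → AtC13 | Fail12@ret261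
      walk3a  Fail12 → Err12@cut170 (setup_temp_free)             walk3b            Err12 → AtERR (error, jmp 113b22)
-/

open X86 X86.User Asan Vorbis Vorbis.Spec Vorbis.Spec.StartDecoder

set_option maxRecDepth 4000
set_option maxHeartbeats 4000000

namespace Vorbis.Spec.start_decoder_C12

/-- The struct `cb(i)` of the book under construction lies inside the codebooks block, a block of the function's block
predicate: the `hB`, `hin` of `Codebook.site_field`. -/
theorem cb_block {g : Ghost} {i : Nat} {A2 A3 Ai : Arena} {A : Arena × List Obj} {v : State} (h : Cur g i A2 A3 Ai A v) :
    g.Blk A (codebooksBlock v.mem g.f) ∧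
      (codebooksBlock v.mem g.f).contains (g.cb v.mem i) Off.sizeof.Codebook := by
  have hcb := h.ages.cbOK
  refine ⟨up g A _ (hcb.F2.mono h.ages.exti), ?_⟩
  exact hcb.cb_in i h.lt

/-- The struct `cb(i)` lies in the data space: `cb(i) + 2120` does not wrap. -/
theorem cur_cb_inside {g : Ghost} {i : Nat} {A2 A3 Ai : Arena} {A : Arena × List Obj} {v : State} (h : Cur g i A2 A3 Ai A v) :
    0x100000 ≤ g.cb v.mem i ∧ g.cb v.mem i + 2120 ≤ 0xC00000 := by
  obtain ⟨hB, _⟩ := cb_block h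
  have hok : CodebooksOK (g.Blk A) v.mem g.f := ⟨h.ages.cbOK.F1, hB⟩
  have hin := hok.cb_inside h.sd.env.ok i h.lt
  simp only [voff] at hin
  exact hin

/-- **Every check site of segment C12** (12 sites: load1 c+19H, c+1BH; load4 c, c+4, c+1CH, c+840H; store8 / load8 c+20H): the
`n` bytes at offset `off` of the struct `cb(i)` pass the small check in any memory `m'` whose shadow is that of the cut point
(`hun`: `v_untouched`). `b` is the address as the walker spells it (`hb`: `by simp only [vfield]`). -/
theorem acc_cb {g : Ghost} {i : Nat} {A2 A3 Ai : Arena} {A : Arena × List Obj} {v : State} (h : Cur g i A2 A3 Ai A v)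
    (hsh : ShadowInv A.2 g.frames' g.R v.mem) {m' : Mem} (hun : ShadowUntouched v.mem m') (off n : Nat)
    (hoff : off + n ≤ 2120) (hn : 1 ≤ n) {b : Word} (hb : b = addr (g.cb v.mem i + off)) : AccSmall n m' b := by
  obtain ⟨hB, hin⟩ := cb_block h
  obtain ⟨h1, h2⟩ := cur_cb_inside h
  have hs : Site (g.Live A) (g.cb v.mem i + off) n :=
    Codebook.site_field h.sd.env.live hB hin off n (by simp only [voff]; omega) hn rfl
  apply Vorbis.Spec.check_site hsh hun hs
  rw [hb]
  exact Vorbis.toNat_addr _ (by omega)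

/-- **Where `*f` is** (a stack object of stb_vorbis_open_memory, or an object of `A.2`): in the data space, and off the part of the
stack below the steady stack pointer `R` — what reading a field of `*f` through the function's own pushes needs. -/
theorem obj_where {g : Ghost} {i : Nat} {A2 A3 Ai : Arena} {A : Arena × List Obj} {v : State} (h : Cur g i A2 A3 Ai A v)
    (hsh : ShadowInv A.2 g.frames' g.R v.mem) (hoff : ∀ o, o ∈ A.2 → L.textHi ≤ o.base) :
    0x119d40 ≤ g.f ∧ g.f + 1808 ≤ 0xC00000 ∧ (g.R ≤ g.f ∨ g.f + 1808 ≤ 0x700000 ∨ 0x800000 ≤ g.f) := by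
  have hl : LiveIn A.2 g.frames' g.f Off.sizeof.stb_vorbis := by
    apply h.hand.obj.mono
    intro o ho
    unfold Ghost.frames'
    rw [stackObjs_cons]
    rcases List.mem_append.mp ho with hs | ho'
    · exact List.mem_append_left _ (List.mem_append_right _ hs)
    · exact List.mem_append_right _ ho'
  have hw := hl.where_ hsh hoff (by simp only [voff]; omega)
  simp only [voff] at hw
  exact hw

/-- **`setup_malloc`'s precondition at the two call sites of C12** (0x114e33, 0x114eaf): the state `s` at the callee's entry has
the memory of the cut point but for the function's own pushes below `R` (`hmem`), `rsp = R − 8`, `rdi = f`. -/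
theorem malloc_pre {u₀ : State} {g : Ghost} {i : Nat} {A2 A3 Ai : Arena} {A : Arena × List Obj} {mults : Nat} {v s : State}
    (h : InC12 u₀ g i A2 A3 Ai A mults v) (hun : ShadowUntouched v.mem s.mem)
    (hmem : Mem.EqOn (g.f + 112) (g.f + 136) v.mem s.mem) (hrsp : (s.reg .rsp).toNat + 8 = g.R)
    (hrdi : (s.reg .rdi).toNat = g.f) : (setup_malloc.spec A.2 g.frames' A.1).pre s := by
  have hob := h.cur.sd.bits.OB1
  obtain ⟨hf1, hf2, _⟩ := obj_where h.cur h.frame.shadow h.frame.offText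
  refine ⟨⟨?_, h.frame.offText⟩, ?_, ?_, h.cur.hand.arenaText⟩
  · rw [hrsp]
    exact h.frame.shadow.untouched hun
  · rw [hrdi]
    exact h.cur.sd.env.live _ hob
  · rw [hrdi]
    apply h.cur.sd.arena.frame (by simp only [voff]; omega)
    simp only [voff]
    exact hmem

/-- **A window that segment C12 itself writes** (between its calls): the stack below the steady rsp (the return addresses of the
check calls), the own locals `[R + 34H, R + 598H)` (`last` at `[R+40H]`, `len` at `[R+44H]`), the field `multiplicands` of the
struct at `c`. -/
def QWin (g : Ghost) (c : Nat) (w : Span) : Prop :=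
  (g.R - 408 ≤ w.lo ∧ w.hi ≤ g.R) ∨ (g.R + 0x34 ≤ w.lo ∧ w.hi ≤ g.R + 0x598) ∨ (c + 32 ≤ w.lo ∧ w.hi ≤ c + 40)

/-- The fields of the struct at `c` that segment C12 reads besides K1 – K5 read the same in two memories. -/
structure FieldsEq (m m' : Mem) (c : Nat) : Prop where
  dimensions : Codebook.dimensions m' c = Codebook.dimensions m c
  entries : Codebook.entries m' c = Codebook.entries m c
  sparse : Codebook.sparse m' c = Codebook.sparse m c
  lookup_type : Codebook.lookup_type m' c = Codebook.lookup_type m c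
  lookup_values : Codebook.lookup_values m' c = Codebook.lookup_values m c
  value_bits : Codebook.value_bits m' c = Codebook.value_bits m c
  sorted_entries : Codebook.sorted_entries m' c = Codebook.sorted_entries m c
  N : Codebook.N m' c = Codebook.N m c

/-- The two parts of the struct around the field `multiplicands` are kept: the fields read the same. -/
theorem fields_of_kept {m m' : Mem} {c : Nat} (hlo : (Block.mk c 32).Kept m m')
    (hhi : (Block.mk (c + 40) 2080).Kept m m') : FieldsEq m m' c := by
  have e_dim : Codebook.dimensions m' c = Codebook.dimensions m c := by
    simp only [vacc, voff]
    exact hlo.i32 _ (by simp only []; omega) (by simp only []; omega)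
  have e_ent : Codebook.entries m' c = Codebook.entries m c := by
    simp only [vacc, voff]
    exact hlo.i32 _ (by simp only []; omega) (by simp only []; omega)
  have e_sp : Codebook.sparse m' c = Codebook.sparse m c := by
    simp only [vacc, voff]
    exact hlo.u8 _ (by simp only []; omega) (by simp only []; omega)
  have e_lt : Codebook.lookup_type m' c = Codebook.lookup_type m c := by
    simp only [vacc, voff]
    exact hlo.u8 _ (by simp only []; omega) (by simp only []; omega)
  have e_vb : Codebook.value_bits m' c = Codebook.value_bits m c := by
    simp only [vacc, voff]
    exact hlo.u8 _ (by simp only []; omega) (by simp only []; omega)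
  have e_lv : Codebook.lookup_values m' c = Codebook.lookup_values m c := by
    simp only [vacc, voff]
    exact hlo.u32 _ (by simp only []; omega) (by simp only []; omega)
  have e_se : Codebook.sorted_entries m' c = Codebook.sorted_entries m c := by
    simp only [vacc, voff]
    exact hhi.i32 _ (by simp only []; omega) (by simp only []; omega)
  have e_N : Codebook.N m' c = Codebook.N m c := by
    unfold Codebook.N
    rw [e_sp, e_ent, e_se]
  exact ⟨e_dim, e_ent, e_sp, e_lt, e_lv, e_vb, e_se, e_N⟩

/-- **`Frame` and CUR(i) over the segment's own stores** (`QWin`: pushed return addresses, the locals `last` / `len`, the field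
`multiplicands`): both at the new state, `cb(i)` unmoved, the struct kept around `multiplicands`, every table of book `i` kept,
the slots `[R+28H]` (mults) and `[R+24H]` (the literal 0) kept. -/
theorem quiet_carry {u₀ : State} {g : Ghost} {pc pc' : Word} {i : Nat} {A2 A3 Ai : Arena} {A : Arena × List Obj}
    {v w : State} {ws : List Span} (hF : Frame u₀ g pc A v) (hC : Cur g i A2 A3 Ai A v)
    (hs : Mem.SameExcept ws v.mem w.mem) (hun : ShadowUntouched v.mem w.mem)
    (hq : ∀ x, x ∈ ws → QWin g (g.cb v.mem i) x)
    (hrip : w.rip = pc') (hrsp : w.reg .rsp = v.reg .rsp) (hcode : CodeOK u₀ w.mem) (hinv : abiInv w)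
    (hr14 : w.reg .r14 = v.reg .r14) :
    Frame u₀ g pc' A w ∧ Cur g i A2 A3 Ai A w ∧ g.cb w.mem i = g.cb v.mem i ∧
      (Block.mk (g.cb v.mem i) 32).Kept v.mem w.mem ∧ (Block.mk (g.cb v.mem i + 40) 2080).Kept v.mem w.mem ∧
      (∀ B, Since Ai A.1 B → B.Kept v.mem w.mem) ∧
      w.mem.u64 (g.R + 0x28) = v.mem.u64 (g.R + 0x28) ∧ w.mem.u32 (g.R + 0x24) = v.mem.u32 (g.R + 0x24) := by
  have hpos : Pos g A := Pos.of hF hC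
  have hm0 : MInv g i A2 A3 Ai A v.mem := MInv.of hF hC
  obtain ⟨⟨hc1, hc2⟩, hc3, hc4⟩ := hm0.c_where
  have p1 := hpos.r_eq
  have p2 := hpos.ra_lo
  have p3 := hpos.ra_hi
  have p4 := hpos.ar_lo
  have p5 := hpos.ar_hi
  have p6 := hpos.ar_stack
  have hok0 : ∀ x, x ∈ ws → OkWin0 g (g.cb v.mem i) x := by
    intro x hx
    have k := hq x hx
    unfold QWin at k
    unfold OkWin0
    omega
  have hok : ∀ x, x ∈ ws → OkWin g Ai A (g.cb v.mem i) x := fun x hx => (hok0 x hx).ok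
  have hb : Bits (g.Blk A) g.len w.mem g.f := by
    apply bits_kept hpos hC.sd.bits hs
    intro x hx
    have k := hq x hx
    unfold QWin at k
    omega
  have hF' := Frame.step hF hC hs hun hok hb hrip hrsp hcode hinv
  obtain ⟨hC', hcb⟩ := Cur.step hF hC hs hun hok hb hr14
  refine ⟨hF', hC', hcb, ?_, ?_, ?_, ?_, ?_⟩
  · apply Block.Kept.of_sameExcept hs _ (by simp only []; omega)
    intro x hx
    have k := hq x hx
    unfold QWin at k
    simp only []
    omega
  · apply Block.Kept.of_sameExcept hs _ (by simp only []; omega)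
    intro x hx
    have k := hq x hx
    unfold QWin at k
    simp only []
    omega
  · intro B hB
    exact young_kept0 hm0 hpos hs hok0 hB
  · have e : Mem.EqOn (g.R + 0x28) (g.R + 0x30) v.mem w.mem := by
      apply hs.eqOn
      intro x hx
      have k := hq x hx
      unfold QWin at k
      omega
    exact e.u64 (g.R + 0x28) (Nat.le_refl _) (by omega) (by omega)
  · have e : Mem.EqOn (g.R + 0x24) (g.R + 0x28) v.mem w.mem := by
      apply hs.eqOn
      intro x hx
      have k := hq x hx
      unfold QWin at k
      omega
    exact e.u32 (g.R + 0x24) (Nat.le_refl _) (by omega) (by omega)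

/-- **The exit to C14 (0x1150b9, `lookup_type ≠ 1`), pure part**: nothing was stored but the return address of the check call
below the steady rsp; `InC14` is `InC12` with LT = 2 (`type_12` and the branch), LV = E·D ≤ 1FFFFFFFH (`type2_lv`, `prod_le`). -/
theorem build14 {u₀ : State} {g : Ghost} {i : Nat} {A2 A3 Ai : Arena} {A : Arena × List Obj} {mults : Nat} {v w : State}
    {ws : List Span} (h : InC12 u₀ g i A2 A3 Ai A mults v)
    (hs : Mem.SameExcept ws v.mem w.mem) (hun : ShadowUntouched v.mem w.mem)
    (hq : ∀ x, x ∈ ws → g.R - 408 ≤ x.lo ∧ x.hi ≤ g.R)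
    (hlt : ¬ Codebook.lookup_type v.mem (g.cb v.mem i) = 1)
    (hrip : w.rip = Vorbis.L.start_decoder.cut176) (hrsp : w.reg .rsp = v.reg .rsp) (hcode : CodeOK u₀ w.mem)
    (hinv : abiInv w) (hr14 : w.reg .r14 = v.reg .r14) (hrbx : w.reg .rbx = v.reg .rbx) :
    InC14 u₀ g i A2 A3 Ai A mults w := by
  obtain ⟨hF, hC, hcb, hlo, hhi, hyoung, hslot, _⟩ := quiet_carry h.frame h.cur hs hun
    (fun x hx => Or.inl (hq x hx)) hrip hrsp hcode hinv hr14
  have hfe := fields_of_kept hlo hhi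
  have hpos : Pos g A := Pos.of h.frame h.cur
  have hm0 : MInv g i A2 A3 Ai A v.mem := MInv.of h.frame h.cur
  obtain ⟨⟨hc1, hc2⟩, hc3, hc4⟩ := hm0.c_where
  have p1 := hpos.r_eq
  have p2 := hpos.ra_lo
  have p3 := hpos.ra_hi
  have hmu : Codebook.multiplicands w.mem (g.cb v.mem i) = Codebook.multiplicands v.mem (g.cb v.mem i) := by
    have e : Mem.EqOn (g.cb v.mem i + 32) (g.cb v.mem i + 40) v.mem w.mem := by
      apply hs.eqOn
      intro x hx
      have k := hq x hx
      omega
    simp only [vacc, voff]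
    exact e.u64 _ (Nat.le_refl _) (by omega) (by omega)
  have hk : K15 (Since Ai A.1) w.mem (g.cb v.mem i) :=
    K15.of_kept h.k hlo hhi (fun hse => hyoung _ (h.k.k4.sv hse))
  have ht2 : Codebook.lookup_type v.mem (g.cb v.mem i) = 2 := h.type_12.resolve_left hlt
  have hlv := h.type2_lv ht2
  have hprod := h.prod_le
  exact
    { frame := hF
      cur := hC
      k := by rw [hcb]; exact hk
      type2 := by rw [hcb, hfe.lookup_type]; exact ht2
      rbx := by rw [hcb, hfe.lookup_values, hrbx]; exact h.rbx
      lv_eq := by rw [hcb, hfe.lookup_values, hfe.entries, hfe.dimensions]; exact hlv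
      lv_le := by
        rw [hcb, hfe.lookup_values]
        omega
      mults :=
        { slot := by rw [hslot]; exact h.mults.slot
          temps := by rw [hcb, hfe.lookup_values]; exact h.mults.temps
          lv_pos := by rw [hcb, hfe.lookup_values]; exact h.mults.lv_pos
          lv_lt := by rw [hcb, hfe.lookup_values]; exact h.mults.lv_lt }
      mu0 := by rw [hcb, hmu]; exact h.mu0 }

/-- **The assertion at a return of `setup_malloc` in segment C12** (`pc` = 0x114e38 `cut168`, the sparse book; 0x114eb4 `cut169`,
the dense book): the clauses of `InC12` with LT = 1, the ages `Am` (the arena of `AtC12`, before the call), rbx = `sparse`, and the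
allocator's result in rax: NULL, or a block of `4·N·D` bytes allocated since `Am`. -/
structure Ret12 (u₀ : State) (g : Ghost) (i : Nat) (A2 A3 Ai Am : Arena) (A : Arena × List Obj) (mults : Nat) (pc : Word)
    (w : State) : Prop where
  frame : Frame u₀ g pc A w
  cur : Cur g i A2 A3 Ai A w
  extm : Ai.Extends Am
  extm' : Am.Extends A.1
  k : K15 (Since Ai Am) w.mem (g.cb w.mem i)
  type1 : Codebook.lookup_type w.mem (g.cb w.mem i) = 1
  prod_le : Codebook.entries w.mem (g.cb w.mem i) * Codebook.dimensions w.mem (g.cb w.mem i) ≤ 0x1FFFFFFF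
  rbx : w.reg .rbx = addr (Codebook.sparse w.mem (g.cb w.mem i))
  mults : Mults g A w.mem (g.cb w.mem i) mults
  alloc : w.reg .rax ≠ 0 → Since Am A.1 ⟨(w.reg .rax).toNat,
    4 * ((Codebook.N w.mem (g.cb w.mem i)).toNat * (Codebook.dimensions w.mem (g.cb w.mem i)).toNat)⟩

/-- **The slot `q[R+28H]` (mults) over a call of `setup_malloc`**: neither the pushed return address, nor the allocator's stack,
nor its two fields of `*f`, nor any shadow byte is in the function's own frame. -/
theorem ret_slot {g : Ghost} {A : Arena × List Obj} {m ms mr : Mem} {a : Word} {x sp n p : Nat} (hp : Pos g A)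
    (hmem : ms = m.writeLE a 8 x) (ha : a.toNat + 8 = g.R) (hsp : sp + 8 = g.R)
    (hs : Mem.SameExcept [⟨sp - 80, sp⟩, ⟨g.f + 8, g.f + 12⟩, ⟨g.f + 128, g.f + 132⟩, shadowSpan p (p + n)] ms mr) :
    mr.u64 (g.R + 0x28) = m.u64 (g.R + 0x28) := by
  have p1 := hp.r_eq
  have p2 := hp.ra_hi
  have p3 := hp.ra_lo
  have p4 := hp.f_stack
  have hpush : Mem.SameExcept [⟨g.R - 8, g.R⟩] m ms := by
    rw [hmem]
    apply Mem.SameExcept.writeLE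
    · omega
    · refine ⟨_, List.mem_cons_self, ?_, ?_⟩
      · simp only []
        omega
      · simp only []
        omega
  have e1 : Mem.EqOn (g.R + 0x28) (g.R + 0x30) m ms := by
    apply hpush.eqOn
    intro w hw
    rw [List.mem_singleton.mp hw]
    simp only []
    omega
  have e2 : Mem.EqOn (g.R + 0x28) (g.R + 0x30) ms mr := by
    apply hs.eqOn
    intro w hw
    simp only [List.mem_cons, List.mem_nil_iff, or_false] at hw
    rcases hw with rfl | rfl | rfl | rfl
    · simp only []
      omega
    · simp only []
      omega
    · simp only []
      omega
    · unfold shadowSpan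
      simp only []
      omega
  exact (Mem.EqOn.trans e1 e2).u64 (g.R + 0x28) (Nat.le_refl _) (by omega) (by omega)

/-- **`Ret12` from the return of the allocator, pure part** (both arms): `Frame` and `Cur` at the returned state `w` for the ghost
`A'` (the grown one, or `A` itself), `cb(i)` unmoved, every setup block of `A` kept, the slot of `mults`, rbx, and the allocator's
result. -/
theorem build_ret {u₀ : State} {g : Ghost} {i : Nat} {A2 A3 Ai : Arena} {A A' : Arena × List Obj} {mults : Nat} {pc : Word}
    {v w : State} (h : InC12 u₀ g i A2 A3 Ai A mults v) (hF : Frame u₀ g pc A' w) (hC : Cur g i A2 A3 Ai A' w)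
    (hcb : g.cb w.mem i = g.cb v.mem i) (hkept : AllKept A.1.Blk v.mem w.mem) (hext : A.1.Extends A'.1)
    (htemps : A'.1.temps = A.1.temps) (hB : A'.1.B = A.1.B)
    (hslot : w.mem.u64 (g.R + 0x28) = v.mem.u64 (g.R + 0x28))
    (ht1 : Codebook.lookup_type v.mem (g.cb v.mem i) = 1)
    (hrbx : w.reg .rbx = addr (Codebook.sparse v.mem (g.cb v.mem i)))
    (halloc : w.reg .rax ≠ 0 → Since A.1 A'.1 ⟨(w.reg .rax).toNat,
      4 * ((Codebook.N v.mem (g.cb v.mem i)).toNat * (Codebook.dimensions v.mem (g.cb v.mem i)).toNat)⟩) :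
    Ret12 u₀ g i A2 A3 Ai A.1 A' mults pc w := by
  have hcbOK := h.cur.ages.cbOK
  have hkI : AllKept Ai.Blk v.mem w.mem := fun B hB => hkept B (hB.mono h.cur.ages.exti)
  have hstruct : (Codebook.block (g.cb v.mem i)).Kept v.mem w.mem := hcbOK.cb_kept (hkI _ hcbOK.F2) i h.cur.lt
  have hsf := Codebook.SameFields.of_kept hstruct
  have hsv : 1 ≤ Codebook.sorted_entries v.mem (g.cb v.mem i) →
      (Codebook.svBlock v.mem (g.cb v.mem i)).Kept v.mem w.mem := fun hse => hkept _ (h.k.k4.sv hse).1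
  have hk : K15 (Since Ai A.1) w.mem (g.cb v.mem i) := h.k.frame hstruct hsv
  have hN : Codebook.N w.mem (g.cb v.mem i) = Codebook.N v.mem (g.cb v.mem i) := by
    unfold Codebook.N
    rw [hsf.sparse, hsf.entries, hsf.sorted_entries]
  exact
    { frame := hF
      cur := hC
      extm := h.cur.ages.exti
      extm' := hext
      k := by rw [hcb]; exact hk
      type1 := by rw [hcb, hsf.lookup_type]; exact ht1
      prod_le := by rw [hcb, hsf.entries, hsf.dimensions]; exact h.prod_le
      rbx := by rw [hcb, hsf.sparse]; exact hrbx
      mults :=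
        { slot := by rw [hslot]; exact h.mults.slot
          temps := by
            rw [hcb, hsf.lookup_values]
            have ht := h.mults.temps
            unfold TempsAre at ht ⊢
            rw [htemps, hB]
            exact ht
          lv_pos := by rw [hcb, hsf.lookup_values]; exact h.mults.lv_pos
          lv_lt := by rw [hcb, hsf.lookup_values]; exact h.mults.lv_lt }
      alloc := by rw [hcb, hN, hsf.dimensions]; exact halloc }

/-- **The request of `setup_malloc` in C12** (`mov esi, ebp ; imul esi, [r14] ; shl esi, 2`): with `a·b ≤ 1FFFFFFFH` (FIX 3)
neither the 32-bit product nor the shift wraps: `esi = 4·a·b`. -/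
theorem req_eq (a b : Nat) (hab : a * b ≤ 0x1FFFFFFF) (ha : a < 2 ^ 32) (hb : b < 2 ^ 32) :
    (Word.ofBV ((BitVec.ofNat 32 a * BitVec.ofNat 32 b) <<< 2)).toNat % 2 ^ 32 = 4 * (a * b) := by
  rw [Vorbis.toNat_ofBV32, BitVec.toNat_shiftLeft, BitVec.toNat_mul, BitVec.toNat_ofNat, BitVec.toNat_ofNat,
    Nat.mod_eq_of_lt ha, Nat.mod_eq_of_lt hb, Nat.shiftLeft_eq]
  generalize a * b = p at hab
  omega

/-- `movzx ebx, byte [r14+1BH]`: the zero-extended byte is the number itself. -/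
theorem zx8_addr (x : Nat) (hx : x < 256) : Word.ofBV (BitVec.zeroExtend 32 (BitVec.ofNat 8 x)) = addr x := by
  apply eq_addr
  rw [Vorbis.toNat_ofBV32, BitVec.toNat_setWidth, BitVec.toNat_ofNat]
  omega

/-- **N·D ≤ 1FFFFFFFH** (FIX 3 gives E·D ≤ 1FFFFFFFH; N ≤ E by K2, D ≥ 1 by K1), over `Int` and over the naturals. -/
theorem prod_nat {n e d : Int} (hn0 : 0 ≤ n) (hne : n ≤ e) (hd : 1 ≤ d) (h : e * d ≤ 0x1FFFFFFF) :
    n.toNat * d.toNat ≤ 0x1FFFFFFF ∧ n * d ≤ 0x1FFFFFFF := by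
  have h1 : n * d ≤ e * d := Int.mul_le_mul_of_nonneg_right hne (by omega)
  have h2 : n * d ≤ 0x1FFFFFFF := Int.le_trans h1 h
  refine ⟨?_, h2⟩
  obtain ⟨n', rfl⟩ := Int.eq_ofNat_of_zero_le hn0
  obtain ⟨d', rfl⟩ := Int.eq_ofNat_of_zero_le (show (0 : Int) ≤ d by omega)
  rw [Int.toNat_natCast, Int.toNat_natCast]
  rw [← Int.natCast_mul] at h2
  exact Int.ofNat_le.mp h2

/-- The dword at `c` read unsigned is `dimensions` (K1: positive). -/
theorem u32_dim (m : Mem) (c : Nat) (h : 1 ≤ Codebook.dimensions m c) : m.u32 c = (Codebook.dimensions m c).toNat := by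
  simp only [vacc, voff, Nat.add_zero] at h ⊢
  exact m.u32_of_i32_nonneg _ (by omega)

/-- The dword at `c + 4` read unsigned is `entries` (K1: not negative). -/
theorem u32_ent (m : Mem) (c : Nat) (h : 0 ≤ Codebook.entries m c) : m.u32 (c + 4) = (Codebook.entries m c).toNat := by
  simp only [vacc, voff] at h ⊢
  exact m.u32_of_i32_nonneg _ h

/-- The dword at `c + 840H` read unsigned is `sorted_entries` (K2: not negative). -/
theorem u32_se (m : Mem) (c : Nat) (h : 0 ≤ Codebook.sorted_entries m c) :
    m.u32 (c + 2112) = (Codebook.sorted_entries m c).toNat := by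
  simp only [vacc, voff] at h ⊢
  exact m.u32_of_i32_nonneg _ h

/-- **A return of `setup_malloc` in segment C12, both arms** (pure: `s` = the state at the callee's entry, `sr` = the returned
state, as in `Cur.alloc_call`): the request fits — the ghost arena grows by the block of `multiplicands` (`Cur.alloc_call`) — or it
does not — rax = 0, the same ghost (`Cur.alloc_fail_any`). `ersi`: the request is `4·N·D`. -/
theorem malloc_ret {u₀ : State} {g : Ghost} {i : Nat} {A2 A3 Ai : Arena} {A : Arena × List Obj} {mults : Nat} {pc : Word}
    {v s sr : State} {a : Word} {x : Nat} (h : InC12 u₀ g i A2 A3 Ai A mults v)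
    (hmem : s.mem = v.mem.writeLE a 8 x) (ha : a.toNat + 8 = g.R) (hsp : (s.reg .rsp).toNat + 8 = g.R)
    (hrdi : (s.reg .rdi).toNat = g.f)
    (hs : Mem.SameExcept [⟨(s.reg .rsp).toNat - 80, (s.reg .rsp).toNat⟩,
      ⟨(s.reg .rdi).toNat + 8, (s.reg .rdi).toNat + 12⟩, ⟨(s.reg .rdi).toNat + 128, (s.reg .rdi).toNat + 132⟩,
      shadowSpan (A.1.B + A.1.S + 32) (A.1.B + A.1.S + 32 + (s.reg .rsi).toNat % 2 ^ 32)] s.mem sr.mem)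
    (hpost : (setup_malloc.spec A.2 g.frames' A.1).post s sr)
    (hrip : sr.rip = pc) (hrsp : sr.reg .rsp = v.reg .rsp) (hcode : CodeOK u₀ sr.mem) (hinv : abiInv sr)
    (hr14 : sr.reg .r14 = v.reg .r14)
    (ht1 : Codebook.lookup_type v.mem (g.cb v.mem i) = 1)
    (hrbx : sr.reg .rbx = addr (Codebook.sparse v.mem (g.cb v.mem i)))
    (ersi : (s.reg .rsi).toNat % 2 ^ 32 =
      4 * ((Codebook.N v.mem (g.cb v.mem i)).toNat * (Codebook.dimensions v.mem (g.cb v.mem i)).toNat)) :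
    ∃ A', Ret12 u₀ g i A2 A3 Ai A.1 A' mults pc sr := by
  have hpos : Pos g A := Pos.of h.frame h.cur
  have hslot : sr.mem.u64 (g.R + 0x28) = v.mem.u64 (g.R + 0x28) := by
    have hs' := hs
    rw [hrdi] at hs'
    exact ret_slot hpos hmem ha hsp hs'
  by_cases hfit : A.1.Fits ((s.reg .rsi).toNat % 2 ^ 32)
  · -- the request fits: the ghost arena grows by the block of `multiplicands`
    obtain ⟨r1, r2, r3, r4, r5⟩ := Cur.alloc_call h.frame h.cur hmem ha hsp hrdi hs hpost hfit hrip hrsp hcode hinv hr14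
    refine ⟨_, build_ret h r1 r2 r3 r4 (A.1.extends_pushSetup _) rfl rfl hslot ht1 hrbx ?_⟩
    intro _
    have hsince := h.cur.sd.arena.since_pushSetup ((s.reg .rsi).toNat % 2 ^ 32)
    rw [r5, ← ersi, Nat.add_assoc]
    exact hsince
  · -- the request does not fit: rax = 0, the same ghost
    obtain ⟨r1, r2, r3, r4, r5⟩ := Cur.alloc_fail_any h.frame h.cur hmem ha hsp hrdi hs hpost hfit hrip hrsp hcode hinv
      hr14
    exact ⟨A, build_ret h r1 r2 r3 r4 (Arena.Extends.refl _) rfl rfl hslot ht1 hrbx (fun hne => absurd r5 hne)⟩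

/-- **SEGMENT C12, THE FIRST STRETCH (0x114db9 … the returns of `setup_malloc`)**: from the entry assertion `InC12` the machine
reaches — every state on the way in `WayInv` — the entry of C14 (0x1150b9 = `cut176`: `lookup_type ≠ 1`) with `AtC14` (`build14`),
or the return address of one of the two `setup_malloc` calls (0x114e38 = `cut168`, the sparse book; 0x114eb4 = `cut169`, the dense
book) with `Ret12` for the grown ghost arena or, if the request `4·N·D` did not fit, the same one (`malloc_ret`). Proved on the
way: the six check sites of the stretch (load1 c+19H, c+1BH; load4 c+840H, c, c+4, c: `acc_cb`), `setup_malloc`'s precondition at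
both call sites (`malloc_pre`), the request `esi = 4·N·D` without 32-bit wrap (`req_eq`, FIX 3), and that the `goto skip` edge
0x114dfa (sparse ∧ sorted_entries = 0) is dead by K2 / FIX 4. -/
theorem walk1 (Lay : Layout) (hLay : Lay.hi = 0x1000000) (μ : Microarch) (hμ : UserX.MicroOK μ) (u₀ : State)
    (hcode : HasCodeNat Lay u₀ Vorbis.L.start_decoder.entry Vorbis.Code.code_start_decoder.nat Vorbis.L.start_decoder.size)
    (hload1 : Asan.SmallCheck Lay μ Vorbis.WayInv (Vorbis.CodeOK u₀) [.rax, .rdx] 1 Vorbis.L.__asan_load1_noabort.entry)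
    (hload4 : Asan.SmallCheck Lay μ Vorbis.WayInv (Vorbis.CodeOK u₀) [.rax, .rcx, .rdx] 4 Vorbis.L.__asan_load4_noabort.entry)
    (hmalloc : ∀ (others : List Obj) (frames : List (Nat × FrameLayout)) (A : Arena), Calls Lay μ Vorbis.WayInv (Vorbis.conv u₀) Vorbis.L.setup_malloc.entry (Vorbis.Spec.setup_malloc.spec others frames A))
    (g : Ghost) (i : Nat) (v : State) (A : Arena × List Obj) (mults : Nat) (A2 A3 Ai : Arena)
    (h : InC12 u₀ g i A2 A3 Ai A mults v) :
    ReachVia Lay μ WayInv v (fun w => AtC14 u₀ g i w ∨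
      (∃ A', Ret12 u₀ g i A2 A3 Ai A.1 A' mults Vorbis.L.start_decoder.cut168 w) ∨
      (∃ A', Ret12 u₀ g i A2 A3 Ai A.1 A' mults Vorbis.L.start_decoder.cut169 w)) := by
  have he := h.frame.entry
  v_entry he
  have w_rip := h.frame.rip
  have w_rsp := h.frame.rsp
  have c_r14 := h.cur.r14
  have hfr0 := h.frame
  have hR : (v.reg .rsp).toNat = g.R := by
    rw [h.frame.rsp]
    exact Vorbis.toNat_addr _ (by
      have := h.frame.ra
      have := h.frame.r_eq
      omega)
  have c_rbx := h.rbx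
  have w_eq : Mem.EqOn Vorbis.L.textLo Vorbis.L.textHi u₀.mem v.mem := h.frame.code
  have hdf : v.flags .df = false := (show abiInv _ from h.frame.inv).1
  have hmx : v.mxcsr &&& 0x1F80 = 0x1F80 := (show abiInv _ from h.frame.inv).2
  have hsse := Vorbis.sseOK_of_abiInv h.frame.inv
  obtain ⟨hR1, hR2⟩ := h.frame.r_eq
  simp only [depth] at he_room he_stack
  have c_rsp : v.reg .rsp = g.e.reg .rsp - 1480 := by
    have e : g.R = (g.e.reg .rsp).toNat - 1480 := rfl
    rw [w_rsp, e, ← Vorbis.addr_sub_lit _ 1480 (by show (1480 : Nat) ≤ _; omega), Vorbis.addr_toNat]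
  clear w_rsp
  have k_rsp := c_rsp
  have r_lt : v.mem.readLE (addr (g.cb v.mem i) + 25) 1 = Codebook.lookup_type v.mem (g.cb v.mem i) := by
    simp only [vfield, vacc, voff]
  have r_sp : v.mem.readLE (addr (g.cb v.mem i) + 27) 1 = Codebook.sparse v.mem (g.cb v.mem i) := by
    simp only [vfield, vacc, voff]
  have r_f : v.mem.readLE (g.e.reg .rsp - 1456) 8 = g.f := by
    have e : g.e.reg .rsp - 1456 = addr (g.R + 0x18) := by
      have e1 : g.R + 0x18 = (g.e.reg .rsp).toNat - 1456 := by
        show (g.e.reg .rsp).toNat - 1480 + 0x18 = _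
        omega
      rw [e1, ← Vorbis.addr_sub_lit _ 1456 (by show (1456 : Nat) ≤ _; omega), Vorbis.addr_toNat]
    rw [e]
    exact h.cur.slot_f
  -- where the struct `cb(i)` is: inside the data space, off the stack
  obtain ⟨hc1, hc2⟩ := cur_cb_inside h.cur
  have hc_toNat : (addr (g.cb v.mem i)).toNat = g.cb v.mem i := Vorbis.toNat_addr _ (by omega)
  have hc_off : g.cb v.mem i + 2120 ≤ 0x700000 ∨ 0x800000 ≤ g.cb v.mem i := by
    have hcb := h.cur.ages.cbOK
    have hin := hcb.cb_in i h.cur.lt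
    have hoff := h.cur.sd.arena.blk_off_stack (hcb.F2.mono h.cur.ages.exti)
    simp only [vblock, voff] at hin hoff
    unfold Ghost.cb
    omega
  have hm := hmalloc A.2 g.frames' A.1
  have hcur := h.cur
  have hshad := h.frame.shadow
  u_walk hcode [hμ.vendor] until [Vorbis.L.start_decoder.cut175, Vorbis.L.start_decoder.cut176, Vorbis.L.start_decoder.cut4, Vorbis.L.start_decoder.cut166] span [Vorbis.L.textLo, Vorbis.L.textHi] side (v_side)
  · -- 0x114dbd: load1 c+19H (lookup_type)
    have hun : ShadowUntouched v.mem s_114dbd.mem := by v_untouched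
    exact acc_cb hcur hshad hun 25 1 (by omega) (by omega) (by simp only [vfield])
  · -- 0x114dd1: load1 c+1BH (sparse)
    have hun : ShadowUntouched v.mem s_114dd1.mem := by v_untouched
    exact acc_cb hcur hshad hun 27 1 (by omega) (by omega) (by simp only [vfield])
  · -- 0x114e90: load4 c+4 (entries)
    have hun : ShadowUntouched v.mem s_114e90.mem := by v_untouched
    exact acc_cb hcur hshad hun 4 4 (by omega) (by omega) (by simp only [vfield])
  · -- 0x114e9c: load4 c (dimensions)
    have hun : ShadowUntouched v.mem s_114e9c.mem := by v_untouched
    exact acc_cb hcur hshad hun 0 4 (by omega) (by omega) (by simp only [Nat.add_zero])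
  · v_inv
  ·
    -- setup_malloc's precondition: the shadow layer at the callee's entry, `*f` live, ArenaOK, the arena above the text
    have hun : ShadowUntouched v.mem s_114eaf.mem := by v_untouched
    obtain ⟨hf1, hf2, hf3⟩ := obj_where hcur hshad h.frame.offText
    have eR : g.R = (g.e.reg .rsp).toNat - 1480 := rfl
    have ha : (s_114eaf.reg .rsp).toNat = (g.e.reg .rsp).toNat - 1488 := by
      rw [w_rsp]
      u_omega
    apply malloc_pre h hun
    · rw [w_mem]
      apply Mem.EqOn.writeLE
      · u_omega
      · rw [← w_rsp, ha]
        omega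
    · omega
    · rw [w_rdi]
      exact Vorbis.toNat_addr _ (by omega)
  · -- 0x114dea: load4 c+840H (sorted_entries)
    have hun : ShadowUntouched v.mem s_114dea.mem := by v_untouched
    exact acc_cb hcur hshad hun 2112 4 (by omega) (by omega) (by simp only [vfield])
  · -- 0x114e20: load4 c (dimensions)
    have hun : ShadowUntouched v.mem s_114e20.mem := by v_untouched
    exact acc_cb hcur hshad hun 0 4 (by omega) (by omega) (by simp only [Nat.add_zero])
  · v_inv
  ·
    -- setup_malloc's precondition: the shadow layer at the callee's entry, `*f` live, ArenaOK, the arena above the text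
    have hun : ShadowUntouched v.mem s_114e33.mem := by v_untouched
    obtain ⟨hf1, hf2, hf3⟩ := obj_where hcur hshad h.frame.offText
    have eR : g.R = (g.e.reg .rsp).toNat - 1480 := rfl
    have ha : (s_114e33.reg .rsp).toNat = (g.e.reg .rsp).toNat - 1488 := by
      rw [w_rsp]
      u_omega
    apply malloc_pre h hun
    · rw [w_mem]
      apply Mem.EqOn.writeLE
      · u_omega
      · rw [← w_rsp, ha]
        omega
    · omega
    · rw [w_rdi]
      exact Vorbis.toNat_addr _ (by omega)
  · -- 0x1150b9 (cut176): lookup_type ≠ 1, on to C14: nothing stored but the return address of the check call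
    apply ReachVia.done
    left
    have hsx : Mem.SameExcept [⟨g.R - 8, g.R⟩] v.mem s_114dc7.mem := by
      rw [w_mem]
      apply Mem.SameExcept.writeLE
      · u_omega
      · refine ⟨_, List.mem_cons_self, ?_, ?_⟩
        · simp only []
          u_omega
        · simp only []
          u_omega
    have hun : ShadowUntouched v.mem s_114dc7.mem := by v_untouched
    have hinv : abiInv s_114dc7 := by v_inv
    have hq : ∀ x, x ∈ [(⟨g.R - 8, g.R⟩ : Span)] → g.R - 408 ≤ x.lo ∧ x.hi ≤ g.R := by
      intro x hx
      rw [List.mem_singleton.mp hx]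
      simp only []
      omega
    exact ⟨A, mults, A2, A3, Ai, build14 h hsx hun hq (fun e => hbr_114dc7 (by rw [e])) w_rip (w_rsp.trans k_rsp.symm)
      w_eq hinv (w_kept.get .r14 rfl) (w_kept.get .rbx rfl)⟩
  · -- 0x114eb4 (cut169): setup_malloc returned, the dense book (N = entries)
    apply ReachVia.done
    right
    right
    simp only [X86.User.Spec.footprint, vspec] at w_same
    obtain ⟨hf1, hf2, hf3⟩ := obj_where hcur hshad hfr0.offText
    have k1 := h.k.k1
    have k2 := h.k.k2
    have ht12 := h.type_12
    have hsp0 : Codebook.sparse v.mem (g.cb v.mem i) = 0 := by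
      rcases k2.sparse_01 with h0 | h1
      · exact h0
      · rw [h1] at hbr_114ddd
        exact absurd hbr_114ddd (by decide)
    have hrbx : s_114eafr.reg .rbx = addr (Codebook.sparse v.mem (g.cb v.mem i)) := by
      rw [w_rbx]
      exact zx8_addr _ (by omega)
    have ersi : (s_114eaf.reg .rsi).toNat % 2 ^ 32 =
        4 * ((Codebook.N v.mem (g.cb v.mem i)).toNat * (Codebook.dimensions v.mem (g.cb v.mem i)).toNat) := by
      have hprod := (prod_nat k1.ent_nonneg (Int.le_refl _) k1.dim_pos h.prod_le).1
      have e1 := u32_ent v.mem (g.cb v.mem i) k1.ent_nonneg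
      have e2 := u32_dim v.mem (g.cb v.mem i) k1.dim_pos
      rw [w_rsi_114eaf, Codebook.N_dense hsp0]
      simp only [vfield]
      rw [e1, e2]
      exact req_eq _ _ hprod (by rw [← e1]; exact v.mem.u32_lt _) (by rw [← e2]; exact v.mem.u32_lt _)
    exact malloc_ret h w_mem_114eaf (by u_omega) (by rw [w_rsp_114eaf]; u_omega)
      (by rw [w_rdi_114eaf]; exact Vorbis.toNat_addr _ (by omega)) w_same w_post w_rip
      (w_rsp.trans k_rsp.symm) (Vorbis.conv_code_eqOn w_code) w_inv (w_kept.get .r14 rfl)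
      (by omega) hrbx ersi
  · -- 0x114e38 (cut168): setup_malloc returned, the sparse book (N = sorted_entries)
    apply ReachVia.done
    right
    left
    simp only [X86.User.Spec.footprint, vspec] at w_same
    obtain ⟨hf1, hf2, hf3⟩ := obj_where hcur hshad hfr0.offText
    have k1 := h.k.k1
    have k2 := h.k.k2
    have ht12 := h.type_12
    have hsp1 : Codebook.sparse v.mem (g.cb v.mem i) ≠ 0 := by
      intro h0
      rw [h0] at hbr_114ddd
      exact hbr_114ddd (by decide)
    have hrbx : s_114e33r.reg .rbx = addr (Codebook.sparse v.mem (g.cb v.mem i)) := by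
      rw [w_rbx]
      have := k2.sparse_01
      exact zx8_addr _ (by omega)
    have ersi : (s_114e33.reg .rsi).toNat % 2 ^ 32 =
        4 * ((Codebook.N v.mem (g.cb v.mem i)).toNat * (Codebook.dimensions v.mem (g.cb v.mem i)).toNat) := by
      have hprod := (prod_nat k2.se_nonneg k2.se_le k1.dim_pos h.prod_le).1
      have e1 := u32_se v.mem (g.cb v.mem i) k2.se_nonneg
      have e2 := u32_dim v.mem (g.cb v.mem i) k1.dim_pos
      rw [w_rsi_114e33, Codebook.N_sparse hsp1]
      simp only [vfield]
      rw [e1, e2]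
      exact req_eq _ _ hprod (by rw [← e1]; exact v.mem.u32_lt _) (by rw [← e2]; exact v.mem.u32_lt _)
    exact malloc_ret h w_mem_114e33 (by u_omega) (by rw [w_rsp_114e33]; u_omega)
      (by rw [w_rdi_114e33]; exact Vorbis.toNat_addr _ (by omega)) w_same w_post w_rip
      (w_rsp.trans k_rsp.symm) (Vorbis.conv_code_eqOn w_code) w_inv (w_kept.get .r14 rfl)
      (by omega) hrbx ersi
  · -- 0x114dfa (`goto skip`): sparse ∧ sorted_entries = 0 contradicts K2 (FIX 4)
    exfalso
    have k2 := h.k.k2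
    have hse : Codebook.sorted_entries v.mem (g.cb v.mem i) = 0 := by
      simp only [vfield] at hbr_114df8
      have hlt := v.mem.u32_lt (g.cb v.mem i + 2112)
      have e := v.mem.i32_of_u32_lt (g.cb v.mem i + 2112) (by omega)
      simp only [vacc, voff]
      omega
    rcases k2.sparse_01 with h0 | h1
    · rw [h0] at hbr_114ddd
      exact hbr_114ddd (by decide)
    · have := k2.sparse_pos h1
      omega

/-- `mov r13d, ebx` with rbx a small number: the 32-bit copy is the number itself. -/
theorem part32_addr (x : Nat) (hx : x < 2 ^ 32) : Word.ofBV (Word.part .w32 (addr x)) = addr x := by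
  apply eq_addr
  rw [Vorbis.toNat_ofBV32, Vorbis.toNat_part32, Vorbis.toNat_addr _ (by omega)]
  omega

/-- N(c) is a count (K1, K2): not negative, at most `entries`. -/
theorem n_range {Blk : Block → Prop} {m : Mem} {c : Nat} (h : K15 Blk m c) :
    0 ≤ Codebook.N m c ∧ Codebook.N m c ≤ Codebook.entries m c := by
  have k1 := h.k1
  have k2 := h.k2
  unfold Codebook.N
  split
  · exact ⟨k1.ent_nonneg, Int.le_refl _⟩
  · exact ⟨k2.se_nonneg, k2.se_le⟩

/-- **The exit to C13 (0x115057, the head of loop 3910), pure part**: since the return of `setup_malloc` (`Ret12` at `v`) the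
segment stored `c->multiplicands = rax ≠ NULL`, `len = N` into `d[R+44H]`, `last = 0` into `d[R+40H]` and pushed return addresses
(`QWin`); `r12d = j = 0`, `r13d = sparse`. -/
theorem build13 {u₀ : State} {g : Ghost} {i : Nat} {A2 A3 Ai Am : Arena} {A : Arena × List Obj} {mults : Nat} {pc : Word}
    {v w : State} {ws : List Span} (h : Ret12 u₀ g i A2 A3 Ai Am A mults pc v)
    (hs : Mem.SameExcept ws v.mem w.mem) (hun : ShadowUntouched v.mem w.mem)
    (hq : ∀ x, x ∈ ws → QWin g (g.cb v.mem i) x)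
    (hrip : w.rip = Vorbis.L.start_decoder.cut175) (hrsp : w.reg .rsp = v.reg .rsp) (hcode : CodeOK u₀ w.mem)
    (hinv : abiInv w) (hr14 : w.reg .r14 = v.reg .r14)
    (hr12 : w.reg .r12 = addr 0) (hr13 : w.reg .r13 = addr (Codebook.sparse v.mem (g.cb v.mem i)))
    (hmu : w.mem.readLE (addr (g.cb v.mem i) + 32) 8 = (v.reg .rax).toNat) (hne : v.reg .rax ≠ 0)
    (hlen : w.mem.i32 (g.R + 0x44) = Codebook.N v.mem (g.cb v.mem i)) :
    InC13 u₀ g i A2 A3 Ai Am A mults 0 w := by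
  obtain ⟨hF, hC, hcb, hlo, hhi, hyoung, hslot, _⟩ := quiet_carry h.frame h.cur hs hun hq hrip hrsp hcode hinv hr14
  have hfe := fields_of_kept hlo hhi
  have hk : K15 (Since Ai Am) w.mem (g.cb v.mem i) :=
    K15.of_kept h.k hlo hhi (fun hse => hyoung _ ((h.k.k4.sv hse).mono h.extm'))
  obtain ⟨hn0, hne'⟩ := n_range h.k
  have hmu' : Codebook.multiplicands w.mem (g.cb v.mem i) = (v.reg .rax).toNat := by
    simp only [vfield] at hmu
    simp only [vacc, voff]
    exact hmu
  exact
    { frame := hF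
      cur := hC
      extm := h.extm
      extm' := h.extm'
      k := by rw [hcb]; exact hk
      type1 := by rw [hcb, hfe.lookup_type]; exact h.type1
      r12 := hr12
      j_le := by rw [hcb, hfe.N]; exact hn0
      r13 := by rw [hcb, hfe.sparse]; exact hr13
      slot_len := by rw [hcb, hfe.N]; exact hlen
      prod_le := by
        rw [hcb, hfe.N, hfe.dimensions]
        exact (prod_nat hn0 hne' h.k.k1.dim_pos h.prod_le).2
      mu := by
        rw [hcb, hfe.N, hfe.dimensions, hmu']
        exact h.alloc hne
      mults :=
        { slot := by rw [hslot]; exact h.mults.slot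
          temps := by rw [hcb, hfe.lookup_values]; exact h.mults.temps
          lv_pos := by rw [hcb, hfe.lookup_values]; exact h.mults.lv_pos
          lv_lt := by rw [hcb, hfe.lookup_values]; exact h.mults.lv_lt } }

/-- **The assertion on the failure path of C12** (0x114ed4 = `ret261`, after the check of `c->lookup_values`; `multiplicands`
is NULL): CUR(i) with the `mults` temp block on top, rbp = f. From here: `setup_temp_free(f, mults, 2·LV)`, `error(f, 3)`. -/
structure Fail12 (u₀ : State) (g : Ghost) (i : Nat) (A2 A3 Ai : Arena) (A : Arena × List Obj) (mults : Nat) (w : State) :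
    Prop where
  frame : Frame u₀ g Vorbis.L.start_decoder.ret261 A w
  cur : Cur g i A2 A3 Ai A w
  mults : Mults g A w.mem (g.cb w.mem i) mults
  rbp : w.reg .rbp = addr g.f

/-- **The failure path of C12 up to 0x114ed4, pure part**: the NULL was stored into `c->multiplicands`, return addresses pushed. -/
theorem build_fail {u₀ : State} {g : Ghost} {i : Nat} {A2 A3 Ai Am : Arena} {A : Arena × List Obj} {mults : Nat} {pc : Word}
    {v w : State} {ws : List Span} (h : Ret12 u₀ g i A2 A3 Ai Am A mults pc v)
    (hs : Mem.SameExcept ws v.mem w.mem) (hun : ShadowUntouched v.mem w.mem)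
    (hq : ∀ x, x ∈ ws → QWin g (g.cb v.mem i) x)
    (hrip : w.rip = Vorbis.L.start_decoder.ret261) (hrsp : w.reg .rsp = v.reg .rsp) (hcode : CodeOK u₀ w.mem)
    (hinv : abiInv w) (hr14 : w.reg .r14 = v.reg .r14) (hrbp : w.reg .rbp = addr g.f) :
    Fail12 u₀ g i A2 A3 Ai A mults w := by
  obtain ⟨hF, hC, hcb, hlo, hhi, _, hslot, _⟩ := quiet_carry h.frame h.cur hs hun hq hrip hrsp hcode hinv hr14
  have hfe := fields_of_kept hlo hhi
  exact
    { frame := hF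
      cur := hC
      mults :=
        { slot := by rw [hslot]; exact h.mults.slot
          temps := by rw [hcb, hfe.lookup_values]; exact h.mults.temps
          lv_pos := by rw [hcb, hfe.lookup_values]; exact h.mults.lv_pos
          lv_lt := by rw [hcb, hfe.lookup_values]; exact h.mults.lv_lt }
      rbp := hrbp }

/-- `len` of line 3909 as the walker reads it back: a non-negative `int` stored as a dword. -/
theorem len_slot (m : Mem) (a : Nat) (x : Int) (h0 : 0 ≤ x) (hx : x < 2 ^ 31) (h : m.readLE (addr a) 4 = x.toNat) :
    m.i32 a = x := by
  have hu : m.u32 a = x.toNat := h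
  rw [m.i32_of_u32_lt a (by rw [hu]; omega), hu]
  omega

/-- **SEGMENT C12, FROM THE RETURN OF `setup_malloc` AT 0x114e38 (`cut168`, the sparse book)**: `mov rbp, rax`, the checked store
`c->multiplicands = rbp` (0x114e44), the checked NULL test (0x114e51); not NULL: `len = sparse ? sorted_entries : entries` into
`d[R+44H]`, `r12d = 0` (Z24), `last = 0` into `d[R+40H]`, `r13d = sparse`, on to the loop head 0x115057 (`AtC13`, `build13`);
NULL: `mov rbp, [rsp+18H]`, the check of `c->lookup_values`, stop at 0x114ed4 (`ret261`) with `Fail12` (`build_fail`). -/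
theorem walk2a (Lay : Layout) (hLay : Lay.hi = 0x1000000) (μ : Microarch) (hμ : UserX.MicroOK μ) (u₀ : State)
    (hcode : HasCodeNat Lay u₀ Vorbis.L.start_decoder.entry Vorbis.Code.code_start_decoder.nat Vorbis.L.start_decoder.size)
    (hload4 : Asan.SmallCheck Lay μ Vorbis.WayInv (Vorbis.CodeOK u₀) [.rax, .rcx, .rdx] 4 Vorbis.L.__asan_load4_noabort.entry)
    (hstore8 : Asan.SmallCheck Lay μ Vorbis.WayInv (Vorbis.CodeOK u₀) [.rax, .rcx, .rdx] 8 Vorbis.L.__asan_store8_noabort.entry)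
    (hload8 : Asan.SmallCheck Lay μ Vorbis.WayInv (Vorbis.CodeOK u₀) [.rax, .rcx, .rdx] 8 Vorbis.L.__asan_load8_noabort.entry)
    (g : Ghost) (i : Nat) (v : State) (A : Arena × List Obj) (mults : Nat) (A2 A3 Ai Am : Arena)
    (h : Ret12 u₀ g i A2 A3 Ai Am A mults Vorbis.L.start_decoder.cut168 v) :
    ReachVia Lay μ WayInv v (fun w => AtC13 u₀ g i w ∨ Fail12 u₀ g i A2 A3 Ai A mults w) := by
  have he := h.frame.entry
  v_entry he
  have w_rip := h.frame.rip
  have c_r14 := h.cur.r14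
  have c_rbx := h.rbx
  have hfr0 := h.frame
  have hcur := h.cur
  have hshad := h.frame.shadow
  obtain ⟨hR1, hR2⟩ := h.frame.r_eq
  have hR : (v.reg .rsp).toNat = g.R := by
    rw [h.frame.rsp]
    exact Vorbis.toNat_addr _ (by
      have := h.frame.ra
      omega)
  have w_eq : Mem.EqOn Vorbis.L.textLo Vorbis.L.textHi u₀.mem v.mem := h.frame.code
  have hdf : v.flags .df = false := (show abiInv _ from h.frame.inv).1
  have hmx : v.mxcsr &&& 0x1F80 = 0x1F80 := (show abiInv _ from h.frame.inv).2
  have hsse := Vorbis.sseOK_of_abiInv h.frame.inv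
  simp only [depth] at he_room he_stack
  have c_rsp : v.reg .rsp = g.e.reg .rsp - 1480 := by
    have e : g.R = (g.e.reg .rsp).toNat - 1480 := rfl
    rw [h.frame.rsp, e, ← Vorbis.addr_sub_lit _ 1480 (by show (1480 : Nat) ≤ _; omega), Vorbis.addr_toNat]
  have k_rsp := c_rsp
  have eR : g.R = (g.e.reg .rsp).toNat - 1480 := rfl
  have r_f : v.mem.readLE (g.e.reg .rsp - 1456) 8 = g.f := by
    have e : g.e.reg .rsp - 1456 = addr (g.R + 0x18) := by
      have e1 : g.R + 0x18 = (g.e.reg .rsp).toNat - 1456 := by omega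
      rw [e1, ← Vorbis.addr_sub_lit _ 1456 (by show (1456 : Nat) ≤ _; omega), Vorbis.addr_toNat]
    rw [e]
    exact h.cur.slot_f
  have r_mults : v.mem.readLE (g.e.reg .rsp - 1440) 8 = mults := by
    have e : g.e.reg .rsp - 1440 = addr (g.R + 0x28) := by
      have e1 : g.R + 0x28 = (g.e.reg .rsp).toNat - 1440 := by omega
      rw [e1, ← Vorbis.addr_sub_lit _ 1440 (by show (1440 : Nat) ≤ _; omega), Vorbis.addr_toNat]
    rw [e]
    exact h.mults.slot
  have r_z24 : v.mem.readLE (g.e.reg .rsp - 1444) 4 = 0 := by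
    have e : g.e.reg .rsp - 1444 = addr (g.R + 0x24) := by
      have e1 : g.R + 0x24 = (g.e.reg .rsp).toNat - 1444 := by omega
      rw [e1, ← Vorbis.addr_sub_lit _ 1444 (by show (1444 : Nat) ≤ _; omega), Vorbis.addr_toNat]
    rw [e]
    exact h.cur.sd.frame.z24 (by omega) (by omega)
  -- where the struct `cb(i)` is: inside the data space, off the stack
  obtain ⟨hc1, hc2⟩ := cur_cb_inside h.cur
  have hc_toNat : (addr (g.cb v.mem i)).toNat = g.cb v.mem i := Vorbis.toNat_addr _ (by omega)
  have hc_off : g.cb v.mem i + 2120 ≤ 0x700000 ∨ 0x800000 ≤ g.cb v.mem i := by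
    have hcw := (MInv.of h.frame h.cur).c_where
    omega
  have hc_text : 1154368 ≤ g.cb v.mem i := by
    have hcw := (MInv.of h.frame h.cur).c_where
    have ht : Vorbis.L.textHi ≤ A.1.B := h.cur.hand.arenaText
    have e : (Vorbis.L.textHi : Nat) = 1154368 := rfl
    omega
  have k1 := h.k.k1
  have k2 := h.k.k2
  obtain ⟨hn0, hnE⟩ := n_range h.k
  have e44 : addr (g.R + 0x44) = g.e.reg .rsp - 1412 := by
    have e1 : g.R + 0x44 = (g.e.reg .rsp).toNat - 1412 := by omega
    rw [e1, ← Vorbis.addr_sub_lit _ 1412 (by show (1412 : Nat) ≤ _; omega), Vorbis.addr_toNat]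
  obtain ⟨z, c_rax⟩ : ∃ z, v.reg .rax = z := ⟨_, rfl⟩
  u_walk hcode [hμ.vendor] until [Vorbis.L.start_decoder.cut175, Vorbis.L.start_decoder.ret261] span [Vorbis.L.textLo, Vorbis.L.textHi] side (v_side)
  case check_114e3f =>
    -- 0x114e3f: store8 c+20H (multiplicands)
    have hun : ShadowUntouched v.mem s_114e3f.mem := by v_untouched
    exact acc_cb hcur hshad hun 32 8 (by omega) (by omega) (by simp only [vfield])
  case check_114e4c =>
    -- 0x114e4c: load8 c+20H
    have hun : ShadowUntouched v.mem s_114e4c.mem := by v_untouched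
    exact acc_cb hcur hshad hun 32 8 (by omega) (by omega) (by simp only [vfield])
  case check_114ecf =>
    -- 0x114ecf: load4 c+1CH (lookup_values), the failure path
    have hun : ShadowUntouched v.mem s_114ecf.mem := by v_untouched
    exact acc_cb hcur hshad hun 28 4 (by omega) (by omega) (by simp only [vfield])
  case check_114efd =>
    -- 0x114efd: load4 c+4 (entries)
    have hun : ShadowUntouched v.mem s_114efd.mem := by v_untouched
    exact acc_cb hcur hshad hun 4 4 (by omega) (by omega) (by simp only [vfield])
  case check_114e67 =>
    -- 0x114e67: load4 c+840H (sorted_entries)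
    have hun : ShadowUntouched v.mem s_114e67.mem := by v_untouched
    exact acc_cb hcur hshad hun 2112 4 (by omega) (by omega) (by simp only [vfield])
  · -- 0x114ed4 (ret261): `c->multiplicands == NULL`, on to setup_temp_free / error
    apply ReachVia.done
    right
    have hall : Mem.SameExcept [⟨g.R - 8, g.R⟩, ⟨g.cb v.mem i + 32, g.cb v.mem i + 40⟩] v.mem s_114ecfr.mem := by
      u_same
    have hun : ShadowUntouched v.mem s_114ecfr.mem := by v_untouched
    have hinv : abiInv s_114ecfr := by v_inv
    have hq : ∀ x, x ∈ [(⟨g.R - 8, g.R⟩ : Span), ⟨g.cb v.mem i + 32, g.cb v.mem i + 40⟩] → QWin g (g.cb v.mem i) x := by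
      intro x hx
      simp only [List.mem_cons, List.mem_nil_iff, or_false] at hx
      unfold QWin
      rcases hx with rfl | rfl
      · left
        simp only []
        omega
      · right
        right
        simp only []
        omega
    exact build_fail h hall hun hq w_rip (w_rsp.trans k_rsp.symm) w_eq hinv (w_kept.get .r14 rfl) w_rbp
  · -- 0x115057 (cut175) from 0x114f0a: the dense book, len = entries
    apply ReachVia.done
    left
    have hall : Mem.SameExcept [⟨g.R - 8, g.R⟩, ⟨g.cb v.mem i + 32, g.cb v.mem i + 40⟩, ⟨g.R + 0x40, g.R + 0x48⟩]
        v.mem s_114e87.mem := by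
      u_same
    have hun : ShadowUntouched v.mem s_114e87.mem := by v_untouched
    have hinv : abiInv s_114e87 := by v_inv
    have hq : ∀ x, x ∈ [(⟨g.R - 8, g.R⟩ : Span), ⟨g.cb v.mem i + 32, g.cb v.mem i + 40⟩, ⟨g.R + 0x40, g.R + 0x48⟩] →
        QWin g (g.cb v.mem i) x := by
      intro x hx
      simp only [List.mem_cons, List.mem_nil_iff, or_false] at hx
      unfold QWin
      rcases hx with rfl | rfl | rfl
      · left
        simp only []
        omega
      · right
        right
        simp only []
        omega
      · right
        left
        simp only []
        omega
    have hmu : s_114e87.mem.readLE (addr (g.cb v.mem i) + 32) 8 = (v.reg .rax).toNat := by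
      rw [c_rax]
      u_read
    have hne : v.reg .rax ≠ 0 := by
      rw [c_rax]
      intro e
      rw [e] at hbr_114e56
      exact hbr_114e56 (by decide)
    have hsp0 : Codebook.sparse v.mem (g.cb v.mem i) = 0 := by
      rw [Vorbis.toNat_part32, Vorbis.toNat_addr _ (by have := k2.sparse_01; omega)] at hbr_114e5a
      have := k2.sparse_01
      omega
    have hlen : s_114e87.mem.i32 (g.R + 0x44) = Codebook.N v.mem (g.cb v.mem i) := by
      apply len_slot _ _ _ hn0 (by have := k1.ent_lt; omega)
      rw [e44]
      have e : s_114e87.mem.readLE (g.e.reg .rsp - 1412) 4 =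
          (BitVec.ofNat 32 (v.mem.readLE (addr (g.cb v.mem i) + 4) 4)).toNat := by
        u_read
      rw [e, Codebook.N_dense hsp0, BitVec.toNat_ofNat]
      simp only [vfield]
      rw [u32_ent v.mem (g.cb v.mem i) k1.ent_nonneg]
      have := k1.ent_lt
      omega
    exact ⟨A, mults, 0, A2, A3, Ai, Am, build13 h hall hun hq w_rip (w_rsp.trans k_rsp.symm) w_eq hinv
      (w_kept.get .r14 rfl) (by rw [w_r12]; rfl) (by rw [w_r13]; exact part32_addr _ (by have := k2.sparse_01; omega))
      hmu hne hlen⟩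
  · -- 0x115057 (cut175) from 0x114e87: the sparse book, len = sorted_entries
    apply ReachVia.done
    left
    have hall : Mem.SameExcept [⟨g.R - 8, g.R⟩, ⟨g.cb v.mem i + 32, g.cb v.mem i + 40⟩, ⟨g.R + 0x40, g.R + 0x48⟩]
        v.mem s_114e87.mem := by
      u_same
    have hun : ShadowUntouched v.mem s_114e87.mem := by v_untouched
    have hinv : abiInv s_114e87 := by v_inv
    have hq : ∀ x, x ∈ [(⟨g.R - 8, g.R⟩ : Span), ⟨g.cb v.mem i + 32, g.cb v.mem i + 40⟩, ⟨g.R + 0x40, g.R + 0x48⟩] →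
        QWin g (g.cb v.mem i) x := by
      intro x hx
      simp only [List.mem_cons, List.mem_nil_iff, or_false] at hx
      unfold QWin
      rcases hx with rfl | rfl | rfl
      · left
        simp only []
        omega
      · right
        right
        simp only []
        omega
      · right
        left
        simp only []
        omega
    have hmu : s_114e87.mem.readLE (addr (g.cb v.mem i) + 32) 8 = (v.reg .rax).toNat := by
      rw [c_rax]
      u_read
    have hne : v.reg .rax ≠ 0 := by
      rw [c_rax]
      intro e
      rw [e] at hbr_114e56
      exact hbr_114e56 (by decide)
    have hsp1 : Codebook.sparse v.mem (g.cb v.mem i) ≠ 0 := by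
      intro h0
      rw [h0] at hbr_114e5a
      exact hbr_114e5a (by decide)
    have hlen : s_114e87.mem.i32 (g.R + 0x44) = Codebook.N v.mem (g.cb v.mem i) := by
      apply len_slot _ _ _ hn0 (by have := k1.ent_lt; omega)
      rw [e44]
      have e : s_114e87.mem.readLE (g.e.reg .rsp - 1412) 4 =
          (BitVec.ofNat 32 (v.mem.readLE (addr (g.cb v.mem i) + 2112) 4)).toNat := by
        u_read
      rw [e, Codebook.N_sparse hsp1, BitVec.toNat_ofNat]
      simp only [vfield]
      rw [u32_se v.mem (g.cb v.mem i) k2.se_nonneg]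
      have := k1.ent_lt
      have := k2.se_le
      omega
    exact ⟨A, mults, 0, A2, A3, Ai, Am, build13 h hall hun hq w_rip (w_rsp.trans k_rsp.symm) w_eq hinv
      (w_kept.get .r14 rfl) (by rw [w_r12]; rfl) (by rw [w_r13]; exact part32_addr _ (by have := k2.sparse_01; omega))
      hmu hne hlen⟩

/-- **SEGMENT C12, FROM THE RETURN OF `setup_malloc` AT 0x114eb4 (`cut169`, the dense book)**: as `walk2a`, with the store at
0x114ec0 and the `jmp 114e48` behind it. -/
theorem walk2b (Lay : Layout) (hLay : Lay.hi = 0x1000000) (μ : Microarch) (hμ : UserX.MicroOK μ) (u₀ : State)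
    (hcode : HasCodeNat Lay u₀ Vorbis.L.start_decoder.entry Vorbis.Code.code_start_decoder.nat Vorbis.L.start_decoder.size)
    (hload4 : Asan.SmallCheck Lay μ Vorbis.WayInv (Vorbis.CodeOK u₀) [.rax, .rcx, .rdx] 4 Vorbis.L.__asan_load4_noabort.entry)
    (hstore8 : Asan.SmallCheck Lay μ Vorbis.WayInv (Vorbis.CodeOK u₀) [.rax, .rcx, .rdx] 8 Vorbis.L.__asan_store8_noabort.entry)
    (hload8 : Asan.SmallCheck Lay μ Vorbis.WayInv (Vorbis.CodeOK u₀) [.rax, .rcx, .rdx] 8 Vorbis.L.__asan_load8_noabort.entry)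
    (g : Ghost) (i : Nat) (v : State) (A : Arena × List Obj) (mults : Nat) (A2 A3 Ai Am : Arena)
    (h : Ret12 u₀ g i A2 A3 Ai Am A mults Vorbis.L.start_decoder.cut169 v) :
    ReachVia Lay μ WayInv v (fun w => AtC13 u₀ g i w ∨ Fail12 u₀ g i A2 A3 Ai A mults w) := by
  have he := h.frame.entry
  v_entry he
  have w_rip := h.frame.rip
  have c_r14 := h.cur.r14
  have c_rbx := h.rbx
  have hfr0 := h.frame
  have hcur := h.cur
  have hshad := h.frame.shadow
  obtain ⟨hR1, hR2⟩ := h.frame.r_eq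
  have hR : (v.reg .rsp).toNat = g.R := by
    rw [h.frame.rsp]
    exact Vorbis.toNat_addr _ (by
      have := h.frame.ra
      omega)
  have w_eq : Mem.EqOn Vorbis.L.textLo Vorbis.L.textHi u₀.mem v.mem := h.frame.code
  have hdf : v.flags .df = false := (show abiInv _ from h.frame.inv).1
  have hmx : v.mxcsr &&& 0x1F80 = 0x1F80 := (show abiInv _ from h.frame.inv).2
  have hsse := Vorbis.sseOK_of_abiInv h.frame.inv
  simp only [depth] at he_room he_stack
  have c_rsp : v.reg .rsp = g.e.reg .rsp - 1480 := by
    have e : g.R = (g.e.reg .rsp).toNat - 1480 := rfl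
    rw [h.frame.rsp, e, ← Vorbis.addr_sub_lit _ 1480 (by show (1480 : Nat) ≤ _; omega), Vorbis.addr_toNat]
  have k_rsp := c_rsp
  have eR : g.R = (g.e.reg .rsp).toNat - 1480 := rfl
  have r_f : v.mem.readLE (g.e.reg .rsp - 1456) 8 = g.f := by
    have e : g.e.reg .rsp - 1456 = addr (g.R + 0x18) := by
      have e1 : g.R + 0x18 = (g.e.reg .rsp).toNat - 1456 := by omega
      rw [e1, ← Vorbis.addr_sub_lit _ 1456 (by show (1456 : Nat) ≤ _; omega), Vorbis.addr_toNat]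
    rw [e]
    exact h.cur.slot_f
  have r_mults : v.mem.readLE (g.e.reg .rsp - 1440) 8 = mults := by
    have e : g.e.reg .rsp - 1440 = addr (g.R + 0x28) := by
      have e1 : g.R + 0x28 = (g.e.reg .rsp).toNat - 1440 := by omega
      rw [e1, ← Vorbis.addr_sub_lit _ 1440 (by show (1440 : Nat) ≤ _; omega), Vorbis.addr_toNat]
    rw [e]
    exact h.mults.slot
  have r_z24 : v.mem.readLE (g.e.reg .rsp - 1444) 4 = 0 := by
    have e : g.e.reg .rsp - 1444 = addr (g.R + 0x24) := by
      have e1 : g.R + 0x24 = (g.e.reg .rsp).toNat - 1444 := by omega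
      rw [e1, ← Vorbis.addr_sub_lit _ 1444 (by show (1444 : Nat) ≤ _; omega), Vorbis.addr_toNat]
    rw [e]
    exact h.cur.sd.frame.z24 (by omega) (by omega)
  -- where the struct `cb(i)` is: inside the data space, off the stack
  obtain ⟨hc1, hc2⟩ := cur_cb_inside h.cur
  have hc_toNat : (addr (g.cb v.mem i)).toNat = g.cb v.mem i := Vorbis.toNat_addr _ (by omega)
  have hc_off : g.cb v.mem i + 2120 ≤ 0x700000 ∨ 0x800000 ≤ g.cb v.mem i := by
    have hcw := (MInv.of h.frame h.cur).c_where
    omega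
  have hc_text : 1154368 ≤ g.cb v.mem i := by
    have hcw := (MInv.of h.frame h.cur).c_where
    have ht : Vorbis.L.textHi ≤ A.1.B := h.cur.hand.arenaText
    have e : (Vorbis.L.textHi : Nat) = 1154368 := rfl
    omega
  have k1 := h.k.k1
  have k2 := h.k.k2
  obtain ⟨hn0, hnE⟩ := n_range h.k
  have e44 : addr (g.R + 0x44) = g.e.reg .rsp - 1412 := by
    have e1 : g.R + 0x44 = (g.e.reg .rsp).toNat - 1412 := by omega
    rw [e1, ← Vorbis.addr_sub_lit _ 1412 (by show (1412 : Nat) ≤ _; omega), Vorbis.addr_toNat]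
  obtain ⟨z, c_rax⟩ : ∃ z, v.reg .rax = z := ⟨_, rfl⟩
  u_walk hcode [hμ.vendor] until [Vorbis.L.start_decoder.cut175, Vorbis.L.start_decoder.ret261] span [Vorbis.L.textLo, Vorbis.L.textHi] side (v_side)
  case check_114ebb =>
    -- 0x114ebb: store8 c+20H (multiplicands), the dense book's site
    have hun : ShadowUntouched v.mem s_114ebb.mem := by v_untouched
    exact acc_cb hcur hshad hun 32 8 (by omega) (by omega) (by simp only [vfield])
  case check_114e4c =>
    -- 0x114e4c: load8 c+20H
    have hun : ShadowUntouched v.mem s_114e4c.mem := by v_untouched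
    exact acc_cb hcur hshad hun 32 8 (by omega) (by omega) (by simp only [vfield])
  case check_114ecf =>
    -- 0x114ecf: load4 c+1CH (lookup_values), the failure path
    have hun : ShadowUntouched v.mem s_114ecf.mem := by v_untouched
    exact acc_cb hcur hshad hun 28 4 (by omega) (by omega) (by simp only [vfield])
  case check_114efd =>
    -- 0x114efd: load4 c+4 (entries)
    have hun : ShadowUntouched v.mem s_114efd.mem := by v_untouched
    exact acc_cb hcur hshad hun 4 4 (by omega) (by omega) (by simp only [vfield])
  case check_114e67 =>
    -- 0x114e67: load4 c+840H (sorted_entries)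
    have hun : ShadowUntouched v.mem s_114e67.mem := by v_untouched
    exact acc_cb hcur hshad hun 2112 4 (by omega) (by omega) (by simp only [vfield])
  · -- 0x114ed4 (ret261): `c->multiplicands == NULL`, on to setup_temp_free / error
    apply ReachVia.done
    right
    have hall : Mem.SameExcept [⟨g.R - 8, g.R⟩, ⟨g.cb v.mem i + 32, g.cb v.mem i + 40⟩] v.mem s_114ecfr.mem := by
      u_same
    have hun : ShadowUntouched v.mem s_114ecfr.mem := by v_untouched
    have hinv : abiInv s_114ecfr := by v_inv
    have hq : ∀ x, x ∈ [(⟨g.R - 8, g.R⟩ : Span), ⟨g.cb v.mem i + 32, g.cb v.mem i + 40⟩] → QWin g (g.cb v.mem i) x := by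
      intro x hx
      simp only [List.mem_cons, List.mem_nil_iff, or_false] at hx
      unfold QWin
      rcases hx with rfl | rfl
      · left
        simp only []
        omega
      · right
        right
        simp only []
        omega
    exact build_fail h hall hun hq w_rip (w_rsp.trans k_rsp.symm) w_eq hinv (w_kept.get .r14 rfl) w_rbp
  · -- 0x115057 (cut175) from 0x114f0a: the dense book, len = entries
    apply ReachVia.done
    left
    have hall : Mem.SameExcept [⟨g.R - 8, g.R⟩, ⟨g.cb v.mem i + 32, g.cb v.mem i + 40⟩, ⟨g.R + 0x40, g.R + 0x48⟩]
        v.mem s_114e87.mem := by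
      u_same
    have hun : ShadowUntouched v.mem s_114e87.mem := by v_untouched
    have hinv : abiInv s_114e87 := by v_inv
    have hq : ∀ x, x ∈ [(⟨g.R - 8, g.R⟩ : Span), ⟨g.cb v.mem i + 32, g.cb v.mem i + 40⟩, ⟨g.R + 0x40, g.R + 0x48⟩] →
        QWin g (g.cb v.mem i) x := by
      intro x hx
      simp only [List.mem_cons, List.mem_nil_iff, or_false] at hx
      unfold QWin
      rcases hx with rfl | rfl | rfl
      · left
        simp only []
        omega
      · right
        right
        simp only []
        omega
      · right
        left
        simp only []
        omega
    have hmu : s_114e87.mem.readLE (addr (g.cb v.mem i) + 32) 8 = (v.reg .rax).toNat := by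
      rw [c_rax]
      u_read
    have hne : v.reg .rax ≠ 0 := by
      rw [c_rax]
      intro e
      rw [e] at hbr_114e56
      exact hbr_114e56 (by decide)
    have hsp0 : Codebook.sparse v.mem (g.cb v.mem i) = 0 := by
      rw [Vorbis.toNat_part32, Vorbis.toNat_addr _ (by have := k2.sparse_01; omega)] at hbr_114e5a
      have := k2.sparse_01
      omega
    have hlen : s_114e87.mem.i32 (g.R + 0x44) = Codebook.N v.mem (g.cb v.mem i) := by
      apply len_slot _ _ _ hn0 (by have := k1.ent_lt; omega)
      rw [e44]
      have e : s_114e87.mem.readLE (g.e.reg .rsp - 1412) 4 =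
          (BitVec.ofNat 32 (v.mem.readLE (addr (g.cb v.mem i) + 4) 4)).toNat := by
        u_read
      rw [e, Codebook.N_dense hsp0, BitVec.toNat_ofNat]
      simp only [vfield]
      rw [u32_ent v.mem (g.cb v.mem i) k1.ent_nonneg]
      have := k1.ent_lt
      omega
    exact ⟨A, mults, 0, A2, A3, Ai, Am, build13 h hall hun hq w_rip (w_rsp.trans k_rsp.symm) w_eq hinv
      (w_kept.get .r14 rfl) (by rw [w_r12]; rfl) (by rw [w_r13]; exact part32_addr _ (by have := k2.sparse_01; omega))
      hmu hne hlen⟩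
  · -- 0x115057 (cut175) from 0x114e87: the sparse book, len = sorted_entries
    apply ReachVia.done
    left
    have hall : Mem.SameExcept [⟨g.R - 8, g.R⟩, ⟨g.cb v.mem i + 32, g.cb v.mem i + 40⟩, ⟨g.R + 0x40, g.R + 0x48⟩]
        v.mem s_114e87.mem := by
      u_same
    have hun : ShadowUntouched v.mem s_114e87.mem := by v_untouched
    have hinv : abiInv s_114e87 := by v_inv
    have hq : ∀ x, x ∈ [(⟨g.R - 8, g.R⟩ : Span), ⟨g.cb v.mem i + 32, g.cb v.mem i + 40⟩, ⟨g.R + 0x40, g.R + 0x48⟩] →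
        QWin g (g.cb v.mem i) x := by
      intro x hx
      simp only [List.mem_cons, List.mem_nil_iff, or_false] at hx
      unfold QWin
      rcases hx with rfl | rfl | rfl
      · left
        simp only []
        omega
      · right
        right
        simp only []
        omega
      · right
        left
        simp only []
        omega
    have hmu : s_114e87.mem.readLE (addr (g.cb v.mem i) + 32) 8 = (v.reg .rax).toNat := by
      rw [c_rax]
      u_read
    have hne : v.reg .rax ≠ 0 := by
      rw [c_rax]
      intro e
      rw [e] at hbr_114e56
      exact hbr_114e56 (by decide)
    have hsp1 : Codebook.sparse v.mem (g.cb v.mem i) ≠ 0 := by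
      intro h0
      rw [h0] at hbr_114e5a
      exact hbr_114e5a (by decide)
    have hlen : s_114e87.mem.i32 (g.R + 0x44) = Codebook.N v.mem (g.cb v.mem i) := by
      apply len_slot _ _ _ hn0 (by have := k1.ent_lt; omega)
      rw [e44]
      have e : s_114e87.mem.readLE (g.e.reg .rsp - 1412) 4 =
          (BitVec.ofNat 32 (v.mem.readLE (addr (g.cb v.mem i) + 2112) 4)).toNat := by
        u_read
      rw [e, Codebook.N_sparse hsp1, BitVec.toNat_ofNat]
      simp only [vfield]
      rw [u32_se v.mem (g.cb v.mem i) k2.se_nonneg]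
      have := k1.ent_lt
      have := k2.se_le
      omega
    exact ⟨A, mults, 0, A2, A3, Ai, Am, build13 h hall hun hq w_rip (w_rsp.trans k_rsp.symm) w_eq hinv
      (w_kept.get .r14 rfl) (by rw [w_r12]; rfl) (by rw [w_r13]; exact part32_addr _ (by have := k2.sparse_01; omega))
      hmu hne hlen⟩

/-- **The allocators' common precondition at a call site of part C**: the state `s` at the callee's entry has the memory of the
cut point but for the pushed return address below `R` (`hmem`), `rsp = R − 8`, `rdi = f`. (`malloc_pre` for any `Frame` + `Cur`.) -/
theorem arena_pre {u₀ : State} {g : Ghost} {i : Nat} {A2 A3 Ai : Arena} {A : Arena × List Obj} {pc : Word} {v s : State}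
    (hfr : Frame u₀ g pc A v) (hcur : Cur g i A2 A3 Ai A v) (hun : ShadowUntouched v.mem s.mem)
    (hmem : Mem.EqOn (g.f + 112) (g.f + 136) v.mem s.mem) (hrsp : (s.reg .rsp).toNat + 8 = g.R)
    (hrdi : (s.reg .rdi).toNat = g.f) : ArenaPre A.1 A.2 g.frames' s := by
  have hob := hcur.sd.bits.OB1
  obtain ⟨hf1, hf2, _⟩ := obj_where hcur hfr.shadow hfr.offText
  refine ⟨⟨?_, hfr.offText⟩, ?_, ?_, hcur.hand.arenaText⟩
  · rw [hrsp]
    exact hfr.shadow.untouched hun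
  · rw [hrdi]
    exact hcur.sd.env.live _ hob
  · rw [hrdi]
    apply hcur.sd.arena.frame (by simp only [voff]; omega)
    simp only [voff]
    exact hmem

/-- **The `mults` temp block is the top of the temp stack**: `temps = [(T, 2·LV)]` and `mults = B + T` — the LIFO precondition of
`setup_temp_free(f, mults, 2·LV)`. -/
theorem mults_top {g : Ghost} {A : Arena × List Obj} {mem : Mem} {c mults f : Nat} (hm : Mults g A mem c mults)
    (ha : ArenaOK A.1 A.2 mem f) :
    A.1.temps = (A.1.T, 2 * Codebook.lookup_values mem c) :: [] ∧ mults = A.1.B + A.1.T ∧ A.1.T ≤ A.1.L := by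
  obtain ⟨ht, hb⟩ := hm.temps
  simp only [List.map_cons, List.map_nil] at ht
  have hle := hb (mults, 2 * Codebook.lookup_values mem c) List.mem_cons_self
  simp only [] at hle
  obtain ⟨hT, hL⟩ := ha.top_eq_T ht
  refine ⟨?_, by omega, by omega⟩
  rw [ht, hT]

/-- `mov edx, [r14+1CH] ; add edx, edx` with LV < 2^30: edx = 2·LV. -/
theorem dbl_eq (x : Nat) (hx : x < 2 ^ 30) :
    (Word.ofBV (BitVec.ofNat 32 x + BitVec.ofNat 32 x)).toNat % 2 ^ 32 = 2 * x := by
  rw [Vorbis.toNat_ofBV32, BitVec.toNat_add, BitVec.toNat_ofNat]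
  omega

/-- **The assertion after `setup_temp_free` on the failure path** (0x114ee7 = `cut170`): CUR(i) for the ghost without the `mults`
block, rbp = f. From here: `error(f, VORBIS_outofmem)`. -/
structure Err12 (u₀ : State) (g : Ghost) (i : Nat) (A2 A3 Ai : Arena) (A : Arena × List Obj) (w : State) : Prop where
  frame : Frame u₀ g Vorbis.L.start_decoder.cut170 A w
  cur : Cur g i A2 A3 Ai A w
  rbp : w.reg .rbp = addr g.f

/-- **The exit to the common epilogue (0x113b22) after `error(f, 3)`, pure part**: since the cut point `v` only the stack below the
steady rsp and `f->error` were written; eax = 0: SD.ERR (`Cur.failed`). -/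
theorem build_err {u₀ : State} {g : Ghost} {pc : Word} {i : Nat} {A2 A3 Ai : Arena} {A : Arena × List Obj} {v w : State}
    {ws : List Span} (hF : Frame u₀ g pc A v) (hC : Cur g i A2 A3 Ai A v)
    (hs : Mem.SameExcept ws v.mem w.mem) (hun : ShadowUntouched v.mem w.mem)
    (hq : ∀ x, x ∈ ws → (g.R - 408 ≤ x.lo ∧ x.hi ≤ g.R) ∨ (g.f + 136 ≤ x.lo ∧ x.hi ≤ g.f + 144))
    (hrip : w.rip = Vorbis.L.start_decoder.cut4) (hrsp : w.reg .rsp = v.reg .rsp) (hcode : CodeOK u₀ w.mem)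
    (hinv : abiInv w) (hr14 : w.reg .r14 = v.reg .r14) (hrax : w.reg .rax = 0) : AtERR u₀ g w := by
  have hpos : Pos g A := Pos.of hF hC
  have p1 := hpos.r_eq
  have p2 := hpos.ra_lo
  have hok : ∀ x, x ∈ ws → OkWin g Ai A (g.cb v.mem i) x := by
    intro x hx
    have k := hq x hx
    apply OkWin0.ok
    unfold OkWin0
    omega
  have hb : Bits (g.Blk A) g.len w.mem g.f := by
    apply bits_kept hpos hC.sd.bits hs
    intro x hx
    have k := hq x hx
    omega
  have hF' := Frame.step hF hC hs hun hok hb hrip hrsp hcode hinv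
  obtain ⟨hC', _⟩ := Cur.step hF hC hs hun hok hb hr14
  refine ⟨A, hF', hC'.hand, Or.inl ⟨?_, hC'.failed⟩⟩
  rw [hrax]
  rfl

/-- **SEGMENT C12, THE FAILURE PATH, FIRST CALL (0x114ed4 … 0x114ee7)**: `mov edx, [r14+1CH] ; add edx, edx ; mov rsi, [rsp+28H] ;
mov rdi, rbp ; call setup_temp_free` releases the `mults` temp block (the top of the temp stack: `mults_top`); at the return
(`cut170`) CUR(i) holds for the ghost without it (`Cur.free_call`). -/
theorem walk3a (Lay : Layout) (hLay : Lay.hi = 0x1000000) (μ : Microarch) (hμ : UserX.MicroOK μ) (u₀ : State)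
    (hcode : HasCodeNat Lay u₀ Vorbis.L.start_decoder.entry Vorbis.Code.code_start_decoder.nat Vorbis.L.start_decoder.size)
    (hfree : ∀ (others : List Obj) (frames : List (Nat × FrameLayout)) (A : Arena) (m : Nat) (rest : List (Nat × Nat)), Calls Lay μ Vorbis.WayInv (Vorbis.conv u₀) Vorbis.L.setup_temp_free.entry (Vorbis.Spec.setup_temp_free.spec others frames A m rest))
    (g : Ghost) (i : Nat) (v : State) (A : Arena × List Obj) (mults : Nat) (A2 A3 Ai : Arena)
    (h : Fail12 u₀ g i A2 A3 Ai A mults v) :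
    ReachVia Lay μ WayInv v (fun w => ∃ A', Err12 u₀ g i A2 A3 Ai A' w) := by
  have he := h.frame.entry
  v_entry he
  have w_rip := h.frame.rip
  have c_r14 := h.cur.r14
  have c_rbp := h.rbp
  have hfr0 := h.frame
  have hcur := h.cur
  have hshad := h.frame.shadow
  obtain ⟨hR1, hR2⟩ := h.frame.r_eq
  have hR : (v.reg .rsp).toNat = g.R := by
    rw [h.frame.rsp]
    exact Vorbis.toNat_addr _ (by
      have := h.frame.ra
      omega)
  have w_eq : Mem.EqOn Vorbis.L.textLo Vorbis.L.textHi u₀.mem v.mem := h.frame.code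
  have hdf : v.flags .df = false := (show abiInv _ from h.frame.inv).1
  have hmx : v.mxcsr &&& 0x1F80 = 0x1F80 := (show abiInv _ from h.frame.inv).2
  have hsse := Vorbis.sseOK_of_abiInv h.frame.inv
  simp only [depth] at he_room he_stack
  have c_rsp : v.reg .rsp = g.e.reg .rsp - 1480 := by
    have e : g.R = (g.e.reg .rsp).toNat - 1480 := rfl
    rw [h.frame.rsp, e, ← Vorbis.addr_sub_lit _ 1480 (by show (1480 : Nat) ≤ _; omega), Vorbis.addr_toNat]
  have k_rsp := c_rsp
  have eR : g.R = (g.e.reg .rsp).toNat - 1480 := rfl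
  have r_mults : v.mem.readLE (g.e.reg .rsp - 1440) 8 = mults := by
    have e : g.e.reg .rsp - 1440 = addr (g.R + 0x28) := by
      have e1 : g.R + 0x28 = (g.e.reg .rsp).toNat - 1440 := by omega
      rw [e1, ← Vorbis.addr_sub_lit _ 1440 (by show (1440 : Nat) ≤ _; omega), Vorbis.addr_toNat]
    rw [e]
    exact h.mults.slot
  have r_lv : v.mem.readLE (addr (g.cb v.mem i) + 28) 4 = Codebook.lookup_values v.mem (g.cb v.mem i) := by
    simp only [vfield, vacc, voff]
  -- where the struct `cb(i)` is: inside the data space, off the stack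
  obtain ⟨hc1, hc2⟩ := cur_cb_inside h.cur
  have hc_toNat : (addr (g.cb v.mem i)).toNat = g.cb v.mem i := Vorbis.toNat_addr _ (by omega)
  have hc_off : g.cb v.mem i + 2120 ≤ 0x700000 ∨ 0x800000 ≤ g.cb v.mem i := by
    have hcw := (MInv.of h.frame h.cur).c_where
    omega
  obtain ⟨hf1, hf2, hf3⟩ := obj_where hcur hshad hfr0.offText
  obtain ⟨htemps, hmults, hTL⟩ := mults_top h.mults h.cur.sd.arena
  have hpos : Pos g A := Pos.of h.frame h.cur
  have hfr := hfree A.2 g.frames' A.1 (2 * Codebook.lookup_values v.mem (g.cb v.mem i)) []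
  have hlv := h.mults.lv_lt
  u_walk hcode [hμ.vendor] until [Vorbis.L.start_decoder.cut170] span [Vorbis.L.textLo, Vorbis.L.textHi] side (v_side)
  case call_inv => v_inv
  case pre_114ee2 =>
    -- setup_temp_free's precondition: the allocators' common part, and the LIFO clause (`mults` is the top temp block)
    have hun : ShadowUntouched v.mem s_114ee2.mem := by v_untouched
    have hrdi : (s_114ee2.reg .rdi).toNat = g.f := by
      rw [w_rdi]
      exact Vorbis.toNat_addr _ (by omega)
    have p5 := hpos.ar_hi
    refine ⟨arena_pre hfr0 hcur hun ?_ ?_ hrdi, Or.inr ⟨htemps, ?_, ?_, ?_⟩⟩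
    · rw [w_mem]
      apply Mem.EqOn.writeLE
      · u_omega
      · u_omega
    · rw [w_rsp]
      u_omega
    · rw [w_rsi, hmults]
      exact Vorbis.toNat_addr _ (by omega)
    · rw [w_rdx, dbl_eq _ hlv]
    · rw [hrdi]
      exact setup_temp_free.apart_of_out hcur.sd.arena htemps hpos.objOut
  case cont =>
    -- 0x114ee7 (cut170): setup_temp_free returned: `Cur.free_call`
    simp only [X86.User.Spec.footprint, vspec] at w_same
    have p4 := hpos.ar_lo
    have p5 := hpos.ar_hi
    have e_a : (g.e.reg .rsp - 1488).toNat + 8 = g.R := by u_omega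
    have e_sp : (s_114ee2.reg .rsp).toNat + 8 = g.R := by
      rw [w_rsp_114ee2]
      u_omega
    have e_rdi : (s_114ee2.reg .rdi).toNat = g.f := by
      rw [w_rdi_114ee2]
      exact Vorbis.toNat_addr _ (by omega)
    have hrsi : (s_114ee2.reg .rsi).toNat = A.1.B + A.1.T := by
      rw [w_rsi_114ee2, hmults]
      exact Vorbis.toNat_addr _ (by omega)
    have hsz : r8 ((s_114ee2.reg .rdx).toNat % 2 ^ 32) = r8 (2 * Codebook.lookup_values v.mem (g.cb v.mem i)) := by
      rw [w_rdx_114ee2, dbl_eq _ hlv]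
    have hne : s_114ee2.reg .rsi ≠ 0 := by
      intro e
      rw [e] at hrsi
      have e0 : (0 : Word).toNat = 0 := rfl
      omega
    obtain ⟨r1, r2, _, _⟩ := Cur.free_call hfr0 hcur w_mem_114ee2 e_a e_sp e_rdi htemps hrsi hsz w_same w_post hne w_rip
      (w_rsp.trans k_rsp.symm) (Vorbis.conv_code_eqOn w_code) w_inv (w_kept.get .r14 rfl)
    apply ReachVia.done
    exact ⟨_, r1, r2, (w_kept.get .rbp rfl).trans c_rbp⟩

/-- `*f` is inside one live object of the callers' frames or of `A.2` (OB1 in the form of `error`'s precondition). -/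
theorem obj_live {g : Ghost} {i : Nat} {A2 A3 Ai : Arena} {A : Arena × List Obj} {v : State} (h : Cur g i A2 A3 Ai A v) :
    LiveIn A.2 g.frames' g.f Off.sizeof.stb_vorbis := by
  apply h.hand.obj.mono
  intro o ho
  unfold Ghost.frames'
  rw [stackObjs_cons]
  rcases List.mem_append.mp ho with hs | ho'
  · exact List.mem_append_left _ (List.mem_append_right _ hs)
  · exact List.mem_append_right _ ho'

/-- **SEGMENT C12, THE FAILURE PATH, SECOND CALL (0x114ee7 … 0x113b22)**: `mov esi, 3 ; mov rdi, rbp ; call error ; jmp 113b22`: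
the common epilogue with eax = 0 and SD.ERR (`build_err`). -/
theorem walk3b (Lay : Layout) (hLay : Lay.hi = 0x1000000) (μ : Microarch) (hμ : UserX.MicroOK μ) (u₀ : State)
    (hcode : HasCodeNat Lay u₀ Vorbis.L.start_decoder.entry Vorbis.Code.code_start_decoder.nat Vorbis.L.start_decoder.size)
    (herr : ∀ (others : List Obj) (frames : List (Nat × FrameLayout)), Calls Lay μ Vorbis.WayInv (Vorbis.conv u₀) Vorbis.L.error.entry (Vorbis.Spec.error.spec others frames))
    (g : Ghost) (i : Nat) (v : State) (A : Arena × List Obj) (A2 A3 Ai : Arena)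
    (h : Err12 u₀ g i A2 A3 Ai A v) :
    ReachVia Lay μ WayInv v (fun w => AtERR u₀ g w) := by
  have he := h.frame.entry
  v_entry he
  have w_rip := h.frame.rip
  have c_rbp := h.rbp
  have hfr0 := h.frame
  have hcur := h.cur
  have hshad := h.frame.shadow
  obtain ⟨hR1, hR2⟩ := h.frame.r_eq
  have hR : (v.reg .rsp).toNat = g.R := by
    rw [h.frame.rsp]
    exact Vorbis.toNat_addr _ (by
      have := h.frame.ra
      omega)
  have w_eq : Mem.EqOn Vorbis.L.textLo Vorbis.L.textHi u₀.mem v.mem := h.frame.code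
  have hdf : v.flags .df = false := (show abiInv _ from h.frame.inv).1
  have hmx : v.mxcsr &&& 0x1F80 = 0x1F80 := (show abiInv _ from h.frame.inv).2
  have hsse := Vorbis.sseOK_of_abiInv h.frame.inv
  simp only [depth] at he_room he_stack
  have c_rsp : v.reg .rsp = g.e.reg .rsp - 1480 := by
    have e : g.R = (g.e.reg .rsp).toNat - 1480 := rfl
    rw [h.frame.rsp, e, ← Vorbis.addr_sub_lit _ 1480 (by show (1480 : Nat) ≤ _; omega), Vorbis.addr_toNat]
  have k_rsp := c_rsp
  have eR : g.R = (g.e.reg .rsp).toNat - 1480 := rfl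
  obtain ⟨hf1, hf2, hf3⟩ := obj_where hcur hshad hfr0.offText
  have hpos : Pos g A := Pos.of h.frame h.cur
  have hef := herr A.2 g.frames'
  u_walk hcode [hμ.vendor] until [Vorbis.L.start_decoder.cut4] span [Vorbis.L.textLo, Vorbis.L.textHi] side (v_side)
  case call_inv => v_inv
  case pre_114eef =>
    -- error's precondition: the shadow layer at the callee's entry, `*f` live
    have hun : ShadowUntouched v.mem s_114eef.mem := by v_untouched
    have hrdi : (s_114eef.reg .rdi).toNat = g.f := by
      rw [w_rdi]
      exact Vorbis.toNat_addr _ (by omega)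
    have hap := arena_pre hfr0 hcur hun (by
      rw [w_mem]
      apply Mem.EqOn.writeLE
      · u_omega
      · u_omega) (by
      rw [w_rsp]
      u_omega) hrdi
    refine ⟨hap.shadow, ?_⟩
    rw [hrdi]
    exact obj_live hcur
  case cont =>
    -- 0x114ef4 (cut171): error returned (eax = 0, `f->error = 3`); `jmp 113b22`
    v_after_call w_rsp_114eef w_mem_114eef
    have e_f : (addr g.f).toNat = g.f := Vorbis.toNat_addr _ (by omega)
    simp only [w_rdi_114eef, e_f] at w_same
    have hall : Mem.SameExcept [⟨g.R - 56, g.R⟩, ⟨g.f + 140, g.f + 144⟩] v.mem s_114eefr.mem := by u_same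
    have hunr : ShadowUntouched v.mem s_114eefr.mem := by v_untouched
    have w_rax : s_114eefr.reg .rax = 0 := w_post.1
    u_walk hcode [hμ.vendor] until [Vorbis.L.start_decoder.cut4] span [Vorbis.L.textLo, Vorbis.L.textHi] side (v_side)
    -- 0x113b22 (cut4): the common epilogue, eax = 0
    apply ReachVia.done
    have hinv : abiInv s_114ef4 := by v_inv
    have hq : ∀ x, x ∈ [(⟨g.R - 56, g.R⟩ : Span), ⟨g.f + 140, g.f + 144⟩] →
        (g.R - 408 ≤ x.lo ∧ x.hi ≤ g.R) ∨ (g.f + 136 ≤ x.lo ∧ x.hi ≤ g.f + 144) := by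
      intro x hx
      simp only [List.mem_cons, List.mem_nil_iff, or_false] at hx
      rcases hx with rfl | rfl
      · left
        simp only []
        omega
      · right
        simp only []
        omega
    exact build_err hfr0 hcur (by rw [w_mem]; exact hall) (by rw [w_mem]; exact hunr) hq w_rip (w_rsp.trans k_rsp.symm)
      w_eq hinv (w_kept.get .r14 rfl) w_rax

end Vorbis.Spec.start_decoder_C12
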